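-- pv_equiv track=rewrite | github.com/Kacperon/Projekty | ASD/2etap/zad5/zad5__.py | spacetravel
-- ===== SOURCE A (Python) =====
-- from math import inf
-- import heapq as h
--
-- def Dijkstra_list(G, s, k):
--
--     n=len(G)
--     distance = [ inf for _ in range(n) ]
--     parent = [None for _ in range(n)]
--     visited = [False for _ in range(n)]
--     distance[s] = 0
--
--     # PQ = PriorityQueue()
--     # PQ.put((0, s))
--     PQ=[]
--     h.heappush(PQ,(0,s))
--
--     # while not PQ.empty():
--     while len(PQ):
--
--         # current_distance, vertex = PQ.get()                             # 1. ściągam z kolejki element o najmniejszej odległości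
--         current_distance, vertex = h.heappop(PQ)
--         if current_distance > distance[vertex]: continue                # sprawdzenie, cczy odleglosc z jaka dodano go do kolejki (bo
--                                                                         # moze byc dodany kilka razy zanim zostanie przetworzony) jest
--                                                                         # mniejsza od juz wpisanej najkrotszej sciezki
--
--         for neighbour, weight in G[vertex]:                             # 2. Sprawdzam sąsiadów
--             dist = current_distance + weight
--
--             if dist < distance[neighbour] and not visited[neighbour]:   # Jeśli nie był juz wczesniej przeglądnięty, a odległość z
--                 distance[neighbour] = dist                              # aktualnego jest mniejsza niz wczesniej wpisana- aktualizuje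
--                 parent[neighbour] = vertex                              # odleglosc, zmieniam parenta i dodaje go do kolejki
--                 # PQ.put((dist, neighbour))
--                 h.heappush(PQ,(dist, neighbour))
--         visited[vertex] = True
--     if distance[k]==inf:
--         return None                            # bo przeglądnięci są wszyscy jego sąsiedzi
--     return distance[k]
--
-- def spacetravel( n, E, S, a, b ):
--     n = max(max(u[1] for u in E), a, b) + 1
--     G = [[]for _ in range(n+1)]
--     for u,v,w in E:
--         G[u].append((v,w))
--         G[v].append((u,w))
--     for i in S:
--         G[n].append((i,0))
--         G[i].append((n,0))
--     czas=Dijkstra_list(G,a,b)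
--     return czas
-- ===== SOURCE B (Python) =====
-- def spacetravel(n, E, S, a, b):
--     m = max(max(u[1] for u in E), a, b) + 1
--     # flat list of directed arcs, grouped into adjacency lists in one pass
--     arcs = []
--     for u, v, w in E:
--         arcs.append((u, v, w))
--         arcs.append((v, u, w))
--     for s in S:
--         arcs.append((m, s, 0))
--         arcs.append((s, m, 0))
--     G = [[] for _ in range(m + 1)]
--     for u, v, w in arcs:
--         G[u].append((v, w))
--     # heapless Dijkstra: the frontier is a dict node -> tentative distance;
--     # each round the (distance, node)-smallest entry is removed and expanded
--     dist = [None] * len(G)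
--     done = [False] * len(G)
--     dist[a] = 0
--     frontier = {a: 0}
--     while frontier:
--         d, u = min((dd, uu) for uu, dd in frontier.items())
--         del frontier[u]
--         if d > dist[u]:
--             continue
--         for x, w in G[u]:
--             nd = d + w
--             if not done[x] and (dist[x] is None or nd < dist[x]):
--                 dist[x] = nd
--                 frontier[x] = nd
--         done[u] = True
--     return dist[b]
-- ===== Notes on version B (the rewrite author's own statement) =====
-- stated objective: alternative
-- what changed: B drops heapq and the whole multiset of lazily-deleted heap entries: the frontier is a dict mapping each reached node to its single tentative distance (overwritten in place on improvement), each round removes the (distance, node)-minimal dict entry with a plain min over the items, and the adjacency lists are built by one grouping pass over a flat arc list instead of interleaved double appends.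
import Mathlib
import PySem

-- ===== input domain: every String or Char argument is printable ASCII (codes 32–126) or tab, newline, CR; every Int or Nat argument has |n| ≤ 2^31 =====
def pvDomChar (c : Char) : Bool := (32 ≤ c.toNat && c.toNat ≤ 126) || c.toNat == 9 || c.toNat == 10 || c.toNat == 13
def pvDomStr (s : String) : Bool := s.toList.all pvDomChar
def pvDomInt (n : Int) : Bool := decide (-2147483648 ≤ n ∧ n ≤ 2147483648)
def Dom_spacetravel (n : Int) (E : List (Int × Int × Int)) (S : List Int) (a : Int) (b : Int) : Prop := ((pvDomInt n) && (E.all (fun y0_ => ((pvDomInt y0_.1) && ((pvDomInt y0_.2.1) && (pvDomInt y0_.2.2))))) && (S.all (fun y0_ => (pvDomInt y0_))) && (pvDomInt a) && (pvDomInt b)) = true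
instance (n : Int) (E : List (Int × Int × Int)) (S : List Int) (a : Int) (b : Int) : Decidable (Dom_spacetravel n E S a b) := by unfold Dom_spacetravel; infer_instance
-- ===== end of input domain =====

-- B replaces A's heapq multiset of lazily-deleted (distance, node) entries by a frontier
-- dict holding one tentative distance per node, removing its (distance, node)-minimal item
-- each round with a plain min over the items; same return value.

-- ===== PORT A =====

-- Python tuple comparison (d, v) < (d', v') on int pairs
def pvPairLt (p q : Int × Int) : Bool := p.1 < q.1 || (p.1 == q.1 && p.2 < q.2)

-- heapq.heappop: extract the minimal element (heapq's only observable behaviour on a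
-- list used solely through heappush/heappop); exact on ties (equal tuples are identical)
def pvHeapPop : List (Int × Int) → Option ((Int × Int) × List (Int × Int))
  | [] => none
  | x :: xs =>
    match pvHeapPop xs with
    | none => some (x, [])
    | some (m, rest) => if pvPairLt m x then some (m, x :: rest) else some (x, xs)

-- the inner `for neighbour, weight in G[vertex]` loop of Dijkstra_list
def pvRelaxA (adj : List (Int × Int)) (cd : Int) (vtx : Int) (vis : List Bool)
    (st : List (Option Int) × List (Option Int) × List (Int × Int)) :
    List (Option Int) × List (Option Int) × List (Int × Int) :=
  adj.foldl (fun st xw =>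
    let nd := cd + xw.2
    let better : Bool := match PySem.List.pyGetD st.1 xw.1 none with
      | none => true          -- dist < inf
      | some dx => decide (nd < dx)
    if better && !(PySem.List.pyGetD vis xw.1 false) then
      (PySem.List.pySetD st.1 xw.1 (some nd),
       PySem.List.pySetD st.2.1 xw.1 (some vtx),
       st.2.2 ++ [(nd, xw.1)])
    else st) st

-- the `while len(PQ)` loop of Dijkstra_list (fuel bounds the number of pops; the chosen
-- fuel provably exceeds the number of pops the Python loop performs on Pre_ inputs)
def pvLoopA (G : List (List (Int × Int))) :
    Nat → List (Int × Int) → List (Option Int) → List (Option Int) → List Bool → List (Option Int)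
  | 0, _, dist, _, _ => dist
  | fuel + 1, pq, dist, par, vis =>
    match pvHeapPop pq with
    | none => dist
    | some ((d, v), pq') =>
      if (match PySem.List.pyGetD dist v none with
          | some dv => decide (dv < d)   -- current_distance > distance[vertex]
          | none => false) then
        pvLoopA G fuel pq' dist par vis
      else
        let st := pvRelaxA (PySem.List.pyGetD G v []) d v vis (dist, par, pq')
        pvLoopA G fuel st.2.2 st.1 st.2.1 (PySem.List.pySetD vis v true)

-- Dijkstra_list(G, s, k): distance = None is Python's inf
def pvDijkstra (G : List (List (Int × Int))) (s k : Int) : Option Int :=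
  let N := G.length
  let dist := PySem.List.pySetD (List.replicate N (none : Option Int)) s (some 0)
  let par : List (Option Int) := List.replicate N none
  let vis := List.replicate N false
  let fuel := (G.foldl (fun acc adj => acc + adj.length) 0 + 2) * (2 * N + 2)
  let res := pvLoopA G fuel [(0, s)] dist par vis
  match PySem.List.pyGetD res k none with
  | none => none
  | some x => some x

def spacetravel (n : Int) (E : List (Int × Int × Int)) (S : List Int) (a : Int) (b : Int) : Option Int :=
  match PySem.List.max? (E.map fun e => e.2.1) id with
  | none => none    -- Python: max() of an empty sequence raises ValueError (outside Pre_)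
  | some vm =>
    let m := max (max vm a) b + 1
    let G0 : List (List (Int × Int)) := List.replicate (m + 1).toNat []
    let G1 := E.foldl (fun G e =>
      let Ga := PySem.List.pySetD G e.1 (PySem.List.pyGetD G e.1 [] ++ [(e.2.1, e.2.2)])
      PySem.List.pySetD Ga e.2.1 (PySem.List.pyGetD Ga e.2.1 [] ++ [(e.1, e.2.2)])) G0
    let G2 := S.foldl (fun G i =>
      let Ga := PySem.List.pySetD G m (PySem.List.pyGetD G m [] ++ [(i, (0:Int))])
      PySem.List.pySetD Ga i (PySem.List.pyGetD Ga i [] ++ [(m, (0:Int))])) G1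
    pvDijkstra G2 a b

-- ===== PORT B =====

-- min((dd, uu) for uu, dd in frontier.items())
def pvMinPair (items : List (Int × Int)) : Option (Int × Int) :=
  items.foldl (fun best p =>
    match best with
    | none => some (p.2, p.1)
    | some m => if pvPairLt (p.2, p.1) m then some (p.2, p.1) else some m) none

-- the `for x, w in G[u]` loop of B: update dist and overwrite the frontier entry
def pvRelaxB (adj : List (Int × Int)) (cd : Int) (vis : List Bool)
    (st : List (Option Int) × PySem.Dict Int Int) :
    List (Option Int) × PySem.Dict Int Int :=
  adj.foldl (fun st xw =>
    let nd := cd + xw.2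
    let improve : Bool := match PySem.List.pyGetD st.1 xw.1 none with
      | none => true
      | some dx => decide (nd < dx)
    if !(PySem.List.pyGetD vis xw.1 false) && improve then
      (PySem.List.pySetD st.1 xw.1 (some nd), st.2.insert xw.1 nd)
    else st) st

-- the `while frontier` loop of B (fuel bounds the number of dict removals; the chosen
-- fuel provably exceeds the number of removals the Python loop performs on Pre_ inputs)
def pvLoopB (G : List (List (Int × Int))) :
    Nat → PySem.Dict Int Int → List (Option Int) → List Bool → List (Option Int)
  | 0, _, dist, _ => dist
  | f + 1, F, dist, vis =>
    match pvMinPair F.items with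
    | none => dist
    | some (d, u) =>
      let F1 := F.erase u
      if (match PySem.List.pyGetD dist u none with
          | some du => decide (du < d)   -- d > dist[u]
          | none => false) then
        pvLoopB G f F1 dist vis
      else
        let st := pvRelaxB (PySem.List.pyGetD G u []) d vis (dist, F1)
        pvLoopB G f st.2 st.1 (PySem.List.pySetD vis u true)

def spacetravel_alt (n : Int) (E : List (Int × Int × Int)) (S : List Int) (a : Int) (b : Int) : Option Int :=
  match PySem.List.max? (E.map fun e => e.2.1) id with
  | none => none
  | some vm =>
    let m := max (max vm a) b + 1
    let arcs1 := E.foldl (fun acc e => acc ++ [(e.1, e.2.1, e.2.2), (e.2.1, e.1, e.2.2)])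
      ([] : List (Int × Int × Int))
    let arcs := S.foldl (fun acc i => acc ++ [(m, i, (0:Int)), (i, m, (0:Int))]) arcs1
    let G := arcs.foldl (fun G e =>
      PySem.List.pySetD G e.1 (PySem.List.pyGetD G e.1 [] ++ [(e.2.1, e.2.2)]))
      (List.replicate (m + 1).toNat ([] : List (Int × Int)))
    let N := G.length
    let dist := PySem.List.pySetD (List.replicate N (none : Option Int)) a (some 0)
    let vis := List.replicate N false
    let fuel := (G.foldl (fun acc adj => acc + adj.length) 0 + 1) * (2 * N) + 2
    PySem.List.pyGetD (pvLoopB G fuel (PySem.Dict.mk [(a, (0:Int))]) dist vis) b none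

-- ===== PRECONDITION & SPEC =====

-- the size of the Python list G: max(max(v for _,v,_ in E), a, b) + 2
def pvSize (E : List (Int × Int × Int)) (a b : Int) : Nat :=
  (max (max ((PySem.List.max? (E.map fun e => e.2.1) id).getD 0) a) b + 2).toNat

-- Exactly the inputs on which A returns: E nonempty (else max() raises ValueError) and
-- every list index A uses — u and v of each edge, each member of S, a and b — is a valid
-- (possibly negative, Python-wraparound) index into the list of pvSize E a b vertices.
def Pre_spacetravel (n : Int) (E : List (Int × Int × Int)) (S : List Int) (a : Int) (b : Int) : Prop :=
  E ≠ [] ∧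
  (∀ e ∈ E, PySem.Raise.InRange (pvSize E a b) e.1 ∧ PySem.Raise.InRange (pvSize E a b) e.2.1) ∧
  (∀ i ∈ S, PySem.Raise.InRange (pvSize E a b) i) ∧
  PySem.Raise.InRange (pvSize E a b) a ∧ PySem.Raise.InRange (pvSize E a b) b

instance (n : Int) (E : List (Int × Int × Int)) (S : List Int) (a : Int) (b : Int) : Decidable (Pre_spacetravel n E S a b) := by
  unfold Pre_spacetravel; infer_instance

def pvWitness_spacetravel : Int × (List (Int × Int × Int)) × List Int × Int × Int :=
  (0, [(0, 1, 1)], [], 0, 1)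

def Spec_spacetravel (n : Int) (E : List (Int × Int × Int)) (S : List Int) (a : Int) (b : Int) (out : Option Int) : Prop := out = spacetravel_alt n E S a b
instance (n : Int) (E : List (Int × Int × Int)) (S : List Int) (a : Int) (b : Int) (out : Option Int) : Decidable (Spec_spacetravel n E S a b out) := by unfold Spec_spacetravel; infer_instance

-- ===== CLAIM (what is proved, stated in full; the proofs are below) =====
def Claim_equal_spacetravel : Prop := ∀ (n : Int) (E : List (Int × Int × Int)) (S : List Int) (a : Int) (b : Int), Dom_spacetravel n E S a b → Pre_spacetravel n E S a b → Spec_spacetravel n E S a b (spacetravel n E S a b)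

-- ===== LEMMAS AND PROOFS =====

-- Python's normalisation of a (possibly negative) in-range index
def pvIdx (N : Nat) (i : Int) : Nat := if 0 ≤ i then i.toNat else N - (-i).toNat

lemma pvIdx_lt {N : Nat} {i : Int} (h : PySem.Raise.InRange N i) : pvIdx N i < N := by
  obtain ⟨h1, h2⟩ := h; unfold pvIdx; split <;> omega

lemma pvIdx?_eq {N : Nat} {i : Int} (h : PySem.Raise.InRange N i) :
    PySem.List.pyIdx? N i = some (pvIdx N i) := by
  obtain ⟨h1, h2⟩ := h
  unfold PySem.List.pyIdx? pvIdx
  split_ifs <;> rfl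

lemma pvGetD_eq {α : Type} (xs : List α) (i : Int) (d : α)
    (h : PySem.Raise.InRange xs.length i) :
    PySem.List.pyGetD xs i d = xs.getD (pvIdx xs.length i) d := by
  simp [PySem.List.pyGetD, PySem.List.pyGet?, pvIdx?_eq h, List.getD]

lemma pvSetD_eq {α : Type} (xs : List α) (i : Int) (v : α)
    (h : PySem.Raise.InRange xs.length i) :
    PySem.List.pySetD xs i v = xs.set (pvIdx xs.length i) v := by
  simp [PySem.List.pySetD, PySem.List.pySet?, pvIdx?_eq h]

lemma pvGetD_set_self {α : Type} (xs : List α) (j : Nat) (v d : α) (h : j < xs.length) :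
    (xs.set j v).getD j d = v := by
  simp [List.getD, h]

lemma pvGetD_set_ne {α : Type} (xs : List α) (i j : Nat) (v d : α) (h : i ≠ j) :
    (xs.set i v).getD j d = xs.getD j d := by
  simp [List.getD, List.getElem?_set_ne h]

-- every neighbour label stored in G is a valid index
def pvWFG (G : List (List (Int × Int))) : Prop :=
  ∀ adj ∈ G, ∀ xw ∈ adj, PySem.Raise.InRange G.length xw.1

-- the bisimulation invariant between A's queue and the intermediate pending/alias arrays
def pvInv (G : List (List (Int × Int))) (pq : List (Int × Int))
    (dist via : List (Option Int)) (pend : List Bool) : Prop :=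
  dist.length = G.length ∧ via.length = G.length ∧ pend.length = G.length ∧
  (∀ e ∈ pq, PySem.Raise.InRange G.length e.2 ∧
     ∃ dx, dist.getD (pvIdx G.length e.2) none = some dx ∧ dx ≤ e.1) ∧
  (∀ e ∈ pq, dist.getD (pvIdx G.length e.2) none = some e.1 →
     pend.getD (pvIdx G.length e.2) false = true ∧
     via.getD (pvIdx G.length e.2) none = some e.2 ∧ pq.count e = 1) ∧
  (∀ j, j < G.length → pend.getD j false = true →
     ∃ d x, dist.getD j none = some d ∧ via.getD j none = some x ∧
       PySem.Raise.InRange G.length x ∧ pvIdx G.length x = j ∧ (d, x) ∈ pq)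

-- termination potential: 2 per unvisited node, 1 per visited-but-pending node
def pvPhi (N : Nat) (vis pend : List Bool) : Nat :=
  ∑ j ∈ Finset.range N, (if vis.getD j false then (if pend.getD j false then 1 else 0) else 2)

lemma pvHeapPop_nil_iff (pq : List (Int × Int)) : pvHeapPop pq = none ↔ pq = [] := by
  cases pq with
  | nil => simp [pvHeapPop]
  | cons x xs =>
    simp only [pvHeapPop]
    cases h : pvHeapPop xs with
    | none => simp
    | some m => cases m with | mk m rest => simp only []; split <;> simp

lemma pvPairLt_irrefl (x : Int × Int) : pvPairLt x x = false := by simp [pvPairLt]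

lemma pvPairLt_asymm' {x y : Int × Int} (h : pvPairLt x y = true) : pvPairLt y x = false := by
  simp [pvPairLt] at h ⊢; omega

lemma pvPairLt_le_trans {x y z : Int × Int} (h1 : pvPairLt x y = false)
    (h2 : pvPairLt y z = false) : pvPairLt x z = false := by
  simp [pvPairLt] at h1 h2 ⊢; omega

lemma pvHeapPop_spec (pq : List (Int × Int)) (m : Int × Int) (rest : List (Int × Int))
    (h : pvHeapPop pq = some (m, rest)) :
    (∃ l r, pq = l ++ m :: r ∧ rest = l ++ r) ∧ ∀ e ∈ pq, pvPairLt e m = false := by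
  induction pq generalizing m rest with
  | nil => simp [pvHeapPop] at h
  | cons x xs ih =>
    simp only [pvHeapPop] at h
    cases hx : pvHeapPop xs with
    | none =>
      rw [hx] at h
      simp only [Option.some.injEq, Prod.mk.injEq] at h
      obtain ⟨hm, hr⟩ := h
      have hxs : xs = [] := (pvHeapPop_nil_iff xs).mp hx
      subst hm hr hxs
      exact ⟨⟨[], [], by simp, by simp⟩, by simp [pvPairLt_irrefl]⟩
    | some p =>
      obtain ⟨m', rest'⟩ := p
      rw [hx] at h
      obtain ⟨⟨l', r', hxs, hrest'⟩, hmin⟩ := ih m' rest' hx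
      cases hlt : pvPairLt m' x with
      | true =>
        simp only [hlt, if_true, Option.some.injEq, Prod.mk.injEq] at h
        obtain ⟨hm, hr⟩ := h
        subst hm hr
        refine ⟨⟨x :: l', r', by simp [hxs], by simp [hrest']⟩, ?_⟩
        intro e he
        rcases List.mem_cons.mp he with rfl | he
        · exact pvPairLt_asymm' hlt
        · exact hmin e he
      | false =>
        simp only [hlt, Bool.false_eq_true, if_false, Option.some.injEq, Prod.mk.injEq] at h
        obtain ⟨hm, hr⟩ := h
        subst hm hr
        refine ⟨⟨[], xs, by simp, by simp⟩, ?_⟩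
        intro e he
        rcases List.mem_cons.mp he with rfl | he
        · exact pvPairLt_irrefl e
        · exact pvPairLt_le_trans (hmin e he) hlt

lemma pvPairLt_total {x y : Int × Int} (hne : x ≠ y) (h : pvPairLt x y = false) :
    pvPairLt y x = true := by
  have hne' : x.1 ≠ y.1 ∨ x.2 ≠ y.2 := by
    by_contra hc; push_neg at hc; exact hne (Prod.ext hc.1 hc.2)
  simp [pvPairLt] at h ⊢; omega

-- ===== the intermediate machine: A's algorithm with explicit pending/alias arrays =====

-- scan picking the pending node with the least (dist, via) key
def pvSelM (N : Nat) (dist via : List (Option Int)) (pend : List Bool) :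
    Option ((Int × Int) × Int) :=
  (PySem.List.pyRange 0 (N : Int) 1).foldl (fun best j =>
    if PySem.List.pyGetD pend j false then
      match PySem.List.pyGetD dist j none, PySem.List.pyGetD via j none with
      | some d, some v =>
        match best with
        | none => some ((d, v), j)
        | some (k, _) => if pvPairLt (d, v) k then some ((d, v), j) else best
      | _, _ => best
    else best) none

def pvRelaxM (adj : List (Int × Int)) (cd : Int) (vis : List Bool)
    (st : List (Option Int) × List (Option Int) × List Bool) :
    List (Option Int) × List (Option Int) × List Bool :=
  adj.foldl (fun st xw =>
    let nd := cd + xw.2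
    let improve : Bool := match PySem.List.pyGetD st.1 xw.1 none with
      | none => true
      | some dx => decide (nd < dx)
    if !(PySem.List.pyGetD vis xw.1 false) && improve then
      (PySem.List.pySetD st.1 xw.1 (some nd),
       PySem.List.pySetD st.2.1 xw.1 (some xw.1),
       PySem.List.pySetD st.2.2 xw.1 true)
    else st) st

def pvLoopM (G : List (List (Int × Int))) :
    Nat → List (Option Int) → List (Option Int) → List Bool → List Bool → List (Option Int)
  | 0, dist, _, _, _ => dist
  | f + 1, dist, via, vis, pend =>
    match pvSelM G.length dist via pend with
    | none => dist
    | some ((d, _), j) =>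
      let pend1 := PySem.List.pySetD pend j false
      let st := pvRelaxM (PySem.List.pyGetD G j []) d vis (dist, via, pend1)
      pvLoopM G f st.1 st.2.1 (PySem.List.pySetD vis j true) st.2.2

-- the step function of pvSelM's scan
def pvSelStep (dist via : List (Option Int)) (pend : List Bool)
    (best : Option ((Int × Int) × Int)) (j : Int) : Option ((Int × Int) × Int) :=
  if PySem.List.pyGetD pend j false then
    match PySem.List.pyGetD dist j none, PySem.List.pyGetD via j none with
    | some d, some v =>
      match best with
      | none => some ((d, v), j)
      | some (k, _) => if pvPairLt (d, v) k then some ((d, v), j) else best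
    | _, _ => best
  else best

lemma pvSelM_eq_fold (N : Nat) (dist via : List (Option Int)) (pend : List Bool) :
    pvSelM N dist via pend =
      (PySem.List.pyRange 0 (N : Int) 1).foldl (pvSelStep dist via pend) none := rfl

lemma pvSelFold_keep (dist via : List (Option Int)) (pend : List Bool)
    (tgt : (Int × Int) × Int) :
    ∀ L : List Int,
    (∀ j ∈ L, ∀ d v, PySem.List.pyGetD pend j false = true →
      PySem.List.pyGetD dist j none = some d → PySem.List.pyGetD via j none = some v →
      pvPairLt (d, v) tgt.1 = false) →
    L.foldl (pvSelStep dist via pend) (some tgt) = some tgt := by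
  intro L
  induction L with
  | nil => intro _; rfl
  | cons j L' ih =>
    intro hL
    have hstep : pvSelStep dist via pend (some tgt) j = some tgt := by
      unfold pvSelStep
      cases hp : PySem.List.pyGetD pend j false with
      | false => simp
      | true =>
        simp only [if_true]
        cases hd : PySem.List.pyGetD dist j none with
        | none => simp
        | some d =>
          cases hv : PySem.List.pyGetD via j none with
          | none => simp
          | some v =>
            have := hL j (List.mem_cons_self) d v hp hd hv
            obtain ⟨k, jj⟩ := tgt
            simp only [] at this ⊢
            rw [this]
            simp
    rw [List.foldl_cons, hstep]
    exact ih (fun j' hj' => hL j' (List.mem_cons_of_mem _ hj'))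

lemma pvSelFold_find (dist via : List (Option Int)) (pend : List Bool)
    (d v : Int) (j0 : Int)
    (hp0 : PySem.List.pyGetD pend j0 false = true)
    (hd0 : PySem.List.pyGetD dist j0 none = some d)
    (hv0 : PySem.List.pyGetD via j0 none = some v) :
    ∀ L : List Int, ∀ acc : Option ((Int × Int) × Int),
    j0 ∈ L →
    (∀ j ∈ L, ∀ d' x', PySem.List.pyGetD pend j false = true →
      PySem.List.pyGetD dist j none = some d' → PySem.List.pyGetD via j none = some x' →
      pvPairLt (d', x') (d, v) = false ∧ ((d', x') = (d, v) → j = j0)) →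
    (acc = none ∨ ∃ k' j', acc = some (k', j') ∧ pvPairLt (d, v) k' = true) →
    L.foldl (pvSelStep dist via pend) acc = some ((d, v), j0) := by
  intro L
  induction L with
  | nil => intro acc h; simp at h
  | cons j L' ih =>
    intro acc hmem hL hacc
    by_cases hj : j = j0
    · subst hj
      have hstep : pvSelStep dist via pend acc j = some ((d, v), j) := by
        unfold pvSelStep
        rw [hp0, hd0, hv0]
        rcases hacc with rfl | ⟨k', j', rfl, hk'⟩
        · simp
        · simp only [if_true, hk']
      rw [List.foldl_cons, hstep]
      exact pvSelFold_keep dist via pend ((d, v), j) L'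
        (fun j' hj' d' v' hp hd hv => (hL j' (List.mem_cons_of_mem _ hj') d' v' hp hd hv).1)
    · have hmem' : j0 ∈ L' := by
        rcases List.mem_cons.mp hmem with h | h
        · exact absurd h.symm hj
        · exact h
      have hL' := fun j' hj' => hL j' (List.mem_cons_of_mem _ hj')
      -- analyse the step on j
      unfold pvSelStep
      rw [List.foldl_cons]
      cases hp : PySem.List.pyGetD pend j false with
      | false => simp only [Bool.false_eq_true, if_false]; exact ih acc hmem' hL' hacc
      | true =>
        simp only [if_true]
        cases hd : PySem.List.pyGetD dist j none with
        | none => exact ih acc hmem' hL' hacc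
        | some d' =>
          cases hv : PySem.List.pyGetD via j none with
          | none => simp only []; exact ih acc hmem' hL' hacc
          | some v' =>
            have hkey := hL j List.mem_cons_self d' v' hp hd hv
            have hne : (d', v') ≠ (d, v) := fun he => hj (hkey.2 he)
            have hgt : pvPairLt (d, v) (d', v') = true := pvPairLt_total hne hkey.1
            rcases hacc with rfl | ⟨k', j', rfl, hk'⟩
            · simp only []
              exact ih _ hmem' hL' (Or.inr ⟨(d', v'), j, rfl, hgt⟩)
            · simp only []
              by_cases hcmp : pvPairLt (d', v') k' = true
              · rw [if_pos hcmp]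
                exact ih _ hmem' hL' (Or.inr ⟨(d', v'), j, rfl, hgt⟩)
              · rw [if_neg hcmp]
                exact ih _ hmem' hL' (Or.inr ⟨k', j', rfl, hk'⟩)

lemma pvGetD_replicate {α : Type} (N j : Nat) (x d : α) :
    (List.replicate N x).getD j d = if j < N then x else d := by
  simp [List.getD, List.getElem?_replicate]
  split <;> simp

lemma pvGetD_int_of_nat {α : Type} (xs : List α) (j : Nat) (d : α) :
    PySem.List.pyGetD xs (j : Int) d = xs.getD j d := by
  simp

-- the scan finds exactly the claimed minimal pending entry
lemma pvSelM_spec (N : Nat) (dist via : List (Option Int)) (pend : List Bool)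
    (hld : dist.length = N) (hlv : via.length = N) (hlp : pend.length = N)
    (d v : Int) (jm : Nat) (hjm : jm < N)
    (hp : pend.getD jm false = true) (hd : dist.getD jm none = some d)
    (hv : via.getD jm none = some v)
    (hmin : ∀ j' : Nat, j' < N → pend.getD j' false = true →
      ∀ d' x', dist.getD j' none = some d' → via.getD j' none = some x' →
      pvPairLt (d', x') (d, v) = false ∧ ((d', x') = (d, v) → j' = jm)) :
    pvSelM N dist via pend = some ((d, v), (jm : Int)) := by
  rw [pvSelM_eq_fold]
  have htonat : ∀ j : Int, j ∈ PySem.List.pyRange 0 (N : Int) 1 → j = ((j.toNat : Nat) : Int) ∧ j.toNat < N := by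
    intro j hj
    have := (PySem.List.mem_pyRange_one).mp hj
    omega
  refine pvSelFold_find dist via pend d v (jm : Int) ?_ ?_ ?_ _ none ?_ ?_ (Or.inl rfl)
  · rw [pvGetD_int_of_nat]; exact hp
  · rw [pvGetD_int_of_nat]; exact hd
  · rw [pvGetD_int_of_nat]; exact hv
  · exact (PySem.List.mem_pyRange_one).mpr (by omega)
  · intro j hj d' x' hp' hd' hv'
    obtain ⟨hje, hjlt⟩ := htonat j hj
    rw [hje, pvGetD_int_of_nat] at hp' hd' hv'
    have := hmin j.toNat hjlt hp' d' x' hd' hv'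
    exact ⟨this.1, fun he => by rw [hje, this.2 he]⟩

lemma pvSelM_none (N : Nat) (dist via : List (Option Int)) (pend : List Bool)
    (h : ∀ j : Nat, j < N → pend.getD j false = false) :
    pvSelM N dist via pend = none := by
  rw [pvSelM_eq_fold]
  have : ∀ L : List Int, (∀ j ∈ L, 0 ≤ j ∧ j < (N : Int)) →
      L.foldl (pvSelStep dist via pend) none = none := by
    intro L
    induction L with
    | nil => intro _; rfl
    | cons j L' ih =>
      intro hL
      have hj := hL j List.mem_cons_self
      have hjp : PySem.List.pyGetD pend j false = false := by
        have : j = ((j.toNat : Nat) : Int) := by omega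
        rw [this, pvGetD_int_of_nat]
        exact h j.toNat (by omega)
      rw [List.foldl_cons]
      unfold pvSelStep
      rw [hjp]
      simp only [Bool.false_eq_true, if_false]
      exact ih (fun j' hj' => hL j' (List.mem_cons_of_mem _ hj'))
  exact this _ (fun j hj => by have := (PySem.List.mem_pyRange_one).mp hj; omega)

lemma pvLoopM_nopend (G : List (List (Int × Int))) (fM : Nat)
    (dist via : List (Option Int)) (vis pend : List Bool)
    (h : ∀ j : Nat, j < G.length → pend.getD j false = false) :
    pvLoopM G fM dist via vis pend = dist := by
  cases fM with
  | zero => rfl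
  | succ f => simp only [pvLoopM, pvSelM_none G.length dist via pend h]

lemma pvPhi_le (N : Nat) (vis pend : List Bool) : pvPhi N vis pend ≤ 2 * N := by
  unfold pvPhi
  calc ∑ j ∈ Finset.range N, (if vis.getD j false then (if pend.getD j false then 1 else 0) else 2)
      ≤ ∑ _j ∈ Finset.range N, 2 := by
        refine Finset.sum_le_sum ?_
        intro j _; split_ifs <;> omega
    _ = 2 * N := by simp [Finset.sum_const, Finset.card_range, smul_eq_mul, Nat.mul_comm]

lemma pvPhi_pos (N : Nat) (vis pend : List Bool) (jm : Nat) (hjm : jm < N)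
    (hp : pend.getD jm false = true) : 1 ≤ pvPhi N vis pend := by
  unfold pvPhi
  have hmem : jm ∈ Finset.range N := Finset.mem_range.mpr hjm
  have hterm : 1 ≤ (if vis.getD jm false then (if pend.getD jm false then 1 else 0) else 2) := by
    rw [hp]; split_ifs <;> simp_all
  calc 1 ≤ (if vis.getD jm false then (if pend.getD jm false then 1 else 0) else 2) := hterm
    _ ≤ _ := Finset.single_le_sum (f := fun j => (if vis.getD j false then (if pend.getD j false then 1 else 0) else 2)) (fun _ _ => Nat.zero_le _) hmem

lemma pvPhi_step (N : Nat) (vis pend pendB : List Bool) (jm : Nat) (hjm : jm < N)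
    (hvlen : vis.length = N) (hplen : pend.length = N)
    (hvisset : ∀ j : Nat, vis.getD j false = true →
      pendB.getD j false = (pend.set jm false).getD j false)
    (hpjm : pend.getD jm false = true) :
    pvPhi N (vis.set jm true) pendB + 1 ≤ pvPhi N vis pend := by
  unfold pvPhi
  have hmem : jm ∈ Finset.range N := Finset.mem_range.mpr hjm
  rw [← Finset.add_sum_erase _ _ hmem, ← Finset.add_sum_erase _ _ hmem]
  have hrest : ∑ j ∈ (Finset.range N).erase jm,
      (if (vis.set jm true).getD j false then (if pendB.getD j false then 1 else 0) else 2) =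
      ∑ j ∈ (Finset.range N).erase jm,
      (if vis.getD j false then (if pend.getD j false then 1 else 0) else 2) := by
    refine Finset.sum_congr rfl ?_
    intro j hj
    have hne : jm ≠ j := fun he => (Finset.mem_erase.mp hj).1 he.symm
    rw [pvGetD_set_ne vis jm j true false hne]
    by_cases hvj : vis.getD j false = true
    · simp only [hvj, hvisset j hvj, pvGetD_set_ne pend jm j false false hne]
    · simp only [Bool.not_eq_true] at hvj
      simp only [hvj, Bool.false_eq_true, if_false]
  rw [hrest]
  have hnew : (if (vis.set jm true).getD jm false then (if pendB.getD jm false then 1 else 0) else 2) + 1 ≤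
      (if vis.getD jm false then (if pend.getD jm false then 1 else 0) else 2) := by
    rw [pvGetD_set_self vis jm true false (by omega : jm < vis.length)]
    by_cases hvjm : vis.getD jm false = true
    · rw [hvisset jm hvjm, pvGetD_set_self pend jm false false (by omega : jm < pend.length), hvjm, hpjm]
      simp
    · simp only [Bool.not_eq_true] at hvjm
      rw [hvjm]
      simp only [if_true, Bool.false_eq_true, if_false]
      split_ifs <;> omega
  omega

-- proof-side names for the relaxation step functions
def pvStepA (cd vtx : Int) (vis : List Bool)
    (st : List (Option Int) × List (Option Int) × List (Int × Int)) (xw : Int × Int) :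
    List (Option Int) × List (Option Int) × List (Int × Int) :=
  if (match PySem.List.pyGetD st.1 xw.1 none with
      | none => true
      | some dx => decide (cd + xw.2 < dx)) && !(PySem.List.pyGetD vis xw.1 false) then
    (PySem.List.pySetD st.1 xw.1 (some (cd + xw.2)),
     PySem.List.pySetD st.2.1 xw.1 (some vtx),
     st.2.2 ++ [(cd + xw.2, xw.1)])
  else st

def pvStepM (cd : Int) (vis : List Bool)
    (st : List (Option Int) × List (Option Int) × List Bool) (xw : Int × Int) :
    List (Option Int) × List (Option Int) × List Bool :=
  if !(PySem.List.pyGetD vis xw.1 false) && (match PySem.List.pyGetD st.1 xw.1 none with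
      | none => true
      | some dx => decide (cd + xw.2 < dx)) then
    (PySem.List.pySetD st.1 xw.1 (some (cd + xw.2)),
     PySem.List.pySetD st.2.1 xw.1 (some xw.1),
     PySem.List.pySetD st.2.2 xw.1 true)
  else st

lemma pvRelaxA_eq_fold (adj : List (Int × Int)) (cd vtx : Int) (vis : List Bool) (st :  List (Option Int) × List (Option Int) × List (Int × Int)) :
    pvRelaxA adj cd vtx vis st = adj.foldl (pvStepA cd vtx vis) st := rfl

lemma pvRelaxM_eq_fold (adj : List (Int × Int)) (cd : Int) (vis : List Bool) (st : List (Option Int) × List (Option Int) × List Bool) :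
    pvRelaxM adj cd vis st = adj.foldl (pvStepM cd vis) st := rfl

-- one relaxation update preserves the invariant
lemma pvInv_update (G : List (List (Int × Int))) (pq : List (Int × Int))
    (dist via : List (Option Int)) (pend : List Bool)
    (hI : pvInv G pq dist via pend) (x nd : Int)
    (hx : PySem.Raise.InRange G.length x) (j : Nat) (hjx : pvIdx G.length x = j)
    (himp : dist.getD j none = none ∨ ∃ dx, dist.getD j none = some dx ∧ nd < dx) :
    pvInv G (pq ++ [(nd, x)]) (dist.set j (some nd)) (via.set j (some x)) (pend.set j true) := by
  obtain ⟨hld, hlv, hlp, hP1, hP2, hP3⟩ := hI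
  have hjN : j < G.length := hjx ▸ pvIdx_lt hx
  have hproj2 : ((nd, x) : Int × Int).2 = x := rfl
  have hproj1 : ((nd, x) : Int × Int).1 = nd := rfl
  have hnotmem : (nd, x) ∉ pq := by
    intro hmem
    obtain ⟨hrg, dx, hdx, hle⟩ := hP1 (nd, x) hmem
    rw [hproj2, hjx] at hdx
    rw [hproj1] at hle
    rcases himp with hnone | ⟨dx', hdx', hlt⟩
    · rw [hdx] at hnone; cases hnone
    · rw [hdx] at hdx'; injection hdx' with hdd; omega
  refine ⟨by simp [hld], by simp [hlv], by simp [hlp], ?_, ?_, ?_⟩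
  · -- P1
    intro e he
    rcases List.mem_append.mp he with he | he
    · obtain ⟨hrg, dx, hdx, hle⟩ := hP1 e he
      refine ⟨hrg, ?_⟩
      by_cases hpos : pvIdx G.length e.2 = j
      · rw [hpos] at hdx
        rcases himp with hnone | ⟨dx', hdx', hlt⟩
        · rw [hdx] at hnone; cases hnone
        · rw [hdx] at hdx'; injection hdx' with hdd
          refine ⟨nd, ?_, by omega⟩
          rw [hpos, pvGetD_set_self _ _ _ _ (by omega)]
      · refine ⟨dx, ?_, hle⟩
        rw [pvGetD_set_ne _ j _ _ _ (fun he2 => hpos he2.symm), hdx]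
    · have he' : e = (nd, x) := by simpa using he
      subst he'
      refine ⟨by rw [hproj2]; exact hx, nd, ?_, by simp⟩
      rw [hproj2, hjx, pvGetD_set_self _ _ _ _ (by omega)]
  · -- P2
    intro e he hval
    rcases List.mem_append.mp he with he | he
    · by_cases hpos : pvIdx G.length e.2 = j
      · exfalso
        rw [hpos, pvGetD_set_self _ _ _ _ (by omega)] at hval
        have he1 : nd = e.1 := by injection hval
        obtain ⟨hrg, dx, hdx, hle⟩ := hP1 e he
        rw [hpos] at hdx
        rcases himp with hnone | ⟨dx', hdx', hlt⟩
        · rw [hdx] at hnone; cases hnone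
        · rw [hdx] at hdx'; injection hdx' with hdd; omega
      · rw [pvGetD_set_ne _ j _ _ _ (fun he2 => hpos he2.symm)] at hval
        obtain ⟨hpe, hve, hce⟩ := hP2 e he hval
        refine ⟨?_, ?_, ?_⟩
        · rw [pvGetD_set_ne _ j _ _ _ (fun he2 => hpos he2.symm)]; exact hpe
        · rw [pvGetD_set_ne _ j _ _ _ (fun he2 => hpos he2.symm)]; exact hve
        · have hne : e ≠ (nd, x) := by
            intro he3
            apply hpos
            rw [he3, hproj2, hjx]
          rw [List.count_append, hce]
          have h0 : List.count e [(nd, x)] = 0 := by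
            rw [List.count_eq_zero]; simp [hne]
          rw [h0]
    · have he' : e = (nd, x) := by simpa using he
      subst he'
      refine ⟨?_, ?_, ?_⟩
      · rw [hproj2, hjx, pvGetD_set_self _ _ _ _ (by omega)]
      · rw [hproj2, hjx, pvGetD_set_self _ _ _ _ (by omega)]
      · rw [List.count_append, List.count_eq_zero.mpr hnotmem, List.count_singleton]
        simp
  · -- P3
    intro j' hj' hpend'
    by_cases hpos : j' = j
    · subst hpos
      refine ⟨nd, x, ?_, ?_, hx, hjx, List.mem_append_right _ (by simp)⟩
      · rw [pvGetD_set_self _ _ _ _ (by omega)]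
      · rw [pvGetD_set_self _ _ _ _ (by omega)]
    · rw [pvGetD_set_ne _ j _ _ _ (fun he2 => hpos he2.symm)] at hpend'
      obtain ⟨d0, x0, hd0, hv0, hrg0, hio0, hmem0⟩ := hP3 j' hj' hpend'
      refine ⟨d0, x0, ?_, ?_, hrg0, hio0, List.mem_append_left _ hmem0⟩
      · rw [pvGetD_set_ne _ j _ _ _ (fun he2 => hpos he2.symm), hd0]
      · rw [pvGetD_set_ne _ j _ _ _ (fun he2 => hpos he2.symm), hv0]

lemma pvRelax_sim (G : List (List (Int × Int))) (cd vtx : Int) (vis : List Bool)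
    (hvis : vis.length = G.length) :
    ∀ (adj : List (Int × Int)) (dist par via : List (Option Int)) (pend : List Bool)
      (pq : List (Int × Int)),
    (∀ xw ∈ adj, PySem.Raise.InRange G.length xw.1) →
    pvInv G pq dist via pend →
    (pvRelaxA adj cd vtx vis (dist, par, pq)).1 = (pvRelaxM adj cd vis (dist, via, pend)).1 ∧
    (pvRelaxA adj cd vtx vis (dist, par, pq)).2.2.length ≤ pq.length + adj.length ∧
    pvInv G (pvRelaxA adj cd vtx vis (dist, par, pq)).2.2
      (pvRelaxM adj cd vis (dist, via, pend)).1
      (pvRelaxM adj cd vis (dist, via, pend)).2.1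
      (pvRelaxM adj cd vis (dist, via, pend)).2.2 ∧
    (∀ j : Nat, vis.getD j false = true →
      (pvRelaxM adj cd vis (dist, via, pend)).2.2.getD j false = pend.getD j false) := by
  intro adj
  induction adj with
  | nil =>
    intro dist par via pend pq _ hI
    exact ⟨rfl, by simp [pvRelaxA], by simpa [pvRelaxA, pvRelaxM] using hI, fun j _ => rfl⟩
  | cons xw adj' ih =>
    intro dist par via pend pq hadj hI
    have hld : dist.length = G.length := hI.1
    have hlv : via.length = G.length := hI.2.1
    have hlp : pend.length = G.length := hI.2.2.1
    have hx : PySem.Raise.InRange G.length xw.1 := hadj xw List.mem_cons_self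
    have hadj' : ∀ yw ∈ adj', PySem.Raise.InRange G.length yw.1 :=
      fun yw hyw => hadj yw (List.mem_cons_of_mem _ hyw)
    have hjN : pvIdx G.length xw.1 < G.length := pvIdx_lt hx
    have hgvis : PySem.List.pyGetD vis xw.1 false = vis.getD (pvIdx G.length xw.1) false := by
      rw [pvGetD_eq vis xw.1 false (by rw [hvis]; exact hx), hvis]
    have hgdist : PySem.List.pyGetD dist xw.1 none = dist.getD (pvIdx G.length xw.1) none := by
      rw [pvGetD_eq dist xw.1 none (by rw [hld]; exact hx), hld]
    rw [pvRelaxA_eq_fold, pvRelaxM_eq_fold, List.foldl_cons, List.foldl_cons,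
        ← pvRelaxA_eq_fold, ← pvRelaxM_eq_fold]
    by_cases hc : (!(PySem.List.pyGetD vis xw.1 false) && (match PySem.List.pyGetD dist xw.1 none with
        | none => true
        | some dx => decide (cd + xw.2 < dx))) = true
    · -- the edge improves an unvisited target: both sides update
      obtain ⟨hcv, hci⟩ := Bool.and_eq_true_iff.mp hc
      have hvisj : vis.getD (pvIdx G.length xw.1) false = false := by
        rw [← hgvis]; revert hcv; cases PySem.List.pyGetD vis xw.1 false <;> simp
      have himp : dist.getD (pvIdx G.length xw.1) none = none ∨
          ∃ dx, dist.getD (pvIdx G.length xw.1) none = some dx ∧ cd + xw.2 < dx := by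
        rw [← hgdist]
        cases hdx : PySem.List.pyGetD dist xw.1 none with
        | none => exact Or.inl rfl
        | some dx =>
          refine Or.inr ⟨dx, rfl, ?_⟩
          rw [hdx] at hci
          exact of_decide_eq_true hci
      have hstepA : pvStepA cd vtx vis (dist, par, pq) xw =
          (dist.set (pvIdx G.length xw.1) (some (cd + xw.2)),
           PySem.List.pySetD par xw.1 (some vtx), pq ++ [(cd + xw.2, xw.1)]) := by
        unfold pvStepA
        rw [if_pos (by rw [Bool.and_comm] at hc; exact hc)]
        rw [pvSetD_eq dist xw.1 (some (cd + xw.2)) (by rw [hld]; exact hx), hld]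
      have hstepM : pvStepM cd vis (dist, via, pend) xw =
          (dist.set (pvIdx G.length xw.1) (some (cd + xw.2)),
           via.set (pvIdx G.length xw.1) (some xw.1),
           pend.set (pvIdx G.length xw.1) true) := by
        unfold pvStepM
        rw [if_pos hc]
        rw [pvSetD_eq dist xw.1 (some (cd + xw.2)) (by rw [hld]; exact hx), hld,
            pvSetD_eq via xw.1 (some xw.1) (by rw [hlv]; exact hx), hlv,
            pvSetD_eq pend xw.1 true (by rw [hlp]; exact hx), hlp]
      rw [hstepA, hstepM]
      have hI' := pvInv_update G pq dist via pend hI xw.1 (cd + xw.2) hx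
        (pvIdx G.length xw.1) rfl himp
      obtain ⟨ihEq, ihLen, ihInv, ihPend⟩ := ih (dist.set (pvIdx G.length xw.1) (some (cd + xw.2)))
        (PySem.List.pySetD par xw.1 (some vtx))
        (via.set (pvIdx G.length xw.1) (some xw.1))
        (pend.set (pvIdx G.length xw.1) true)
        (pq ++ [(cd + xw.2, xw.1)]) hadj' hI'
      refine ⟨ihEq, ?_, ihInv, ?_⟩
      · calc (pvRelaxA adj' cd vtx vis _).2.2.length
            ≤ (pq ++ [(cd + xw.2, xw.1)]).length + adj'.length := ihLen
          _ = pq.length + (xw :: adj').length := by simp [List.length_append]; omega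
      · intro j' hvj'
        rw [ihPend j' hvj']
        have hne : pvIdx G.length xw.1 ≠ j' := by
          intro he
          rw [he] at hvisj
          rw [hvisj] at hvj'
          exact Bool.noConfusion hvj'
        exact pvGetD_set_ne pend _ j' true false hne
    · -- no update on either side
      have hcA : ((match PySem.List.pyGetD dist xw.1 none with
          | none => true
          | some dx => decide (cd + xw.2 < dx)) && !(PySem.List.pyGetD vis xw.1 false)) ≠ true := by
        rw [Bool.and_comm]; exact hc
      have hstepA : pvStepA cd vtx vis (dist, par, pq) xw = (dist, par, pq) := by
        unfold pvStepA; rw [if_neg hcA]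
      have hstepM : pvStepM cd vis (dist, via, pend) xw = (dist, via, pend) := by
        unfold pvStepM; rw [if_neg hc]
      rw [hstepA, hstepM]
      obtain ⟨ihEq, ihLen, ihInv, ihPend⟩ := ih dist par via pend pq hadj' hI
      exact ⟨ihEq, le_trans ihLen (by simp), ihInv, ihPend⟩

lemma pvMain (G : List (List (Int × Int))) (T : Nat)
    (hWF : pvWFG G) (hT : ∀ adj ∈ G, adj.length ≤ T) :
    ∀ fA fM (pq : List (Int × Int)) dist par via vis pend,
    vis.length = G.length →
    pvInv G pq dist via pend →
    pq.length + (T + 1) * fM ≤ fA →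
    pvPhi G.length vis pend ≤ fM →
    pvLoopA G fA pq dist par vis = pvLoopM G fM dist via vis pend := by
  intro fA
  induction fA with
  | zero =>
    intro fM pq dist par via vis pend hvis hI hfuel hphi
    have hpq : pq = [] := List.length_eq_zero_iff.mp (by omega)
    subst hpq
    have hnp : ∀ j : Nat, j < G.length → pend.getD j false = false := by
      intro j hj
      by_contra hcon
      have hpt : pend.getD j false = true := by
        revert hcon; cases pend.getD j false <;> simp
      obtain ⟨d0, x0, _, _, _, _, hmem0⟩ := hI.2.2.2.2.2 j hj hpt
      simp at hmem0
    rw [pvLoopM_nopend G fM dist via vis pend hnp]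
    rfl
  | succ f ihf =>
    intro fM pq dist par via vis pend hvis hI hfuel hphi
    cases hpop : pvHeapPop pq with
    | none =>
      have hpq : pq = [] := (pvHeapPop_nil_iff pq).mp hpop
      subst hpq
      have hnp : ∀ j : Nat, j < G.length → pend.getD j false = false := by
        intro j hj
        by_contra hcon
        have hpt : pend.getD j false = true := by
          revert hcon; cases pend.getD j false <;> simp
        obtain ⟨d0, x0, _, _, _, _, hmem0⟩ := hI.2.2.2.2.2 j hj hpt
        simp at hmem0
      rw [pvLoopM_nopend G fM dist via vis pend hnp]
      rfl
    | some mp =>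
      obtain ⟨⟨d, v⟩, rest⟩ := mp
      obtain ⟨⟨l, r, hdecomp, hrest⟩, hmin⟩ := pvHeapPop_spec pq (d, v) rest hpop
      obtain ⟨hld, hlv, hlp, hP1, hP2, hP3⟩ := hI
      have hmem : (d, v) ∈ pq := by rw [hdecomp]; exact List.mem_append_right _ List.mem_cons_self
      have hplen : pq.length = l.length + (r.length + 1) := by rw [hdecomp]; simp
      have hrlen : rest.length = l.length + r.length := by rw [hrest]; simp
      have hmemrest : ∀ e, e ∈ rest → e ∈ pq := by
        intro e he
        rw [hrest] at he
        rw [hdecomp]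
        rcases List.mem_append.mp he with h | h
        · exact List.mem_append_left _ h
        · exact List.mem_append_right _ (List.mem_cons_of_mem _ h)
      have hcount_rest : ∀ e : Int × Int, e ≠ (d, v) → rest.count e = pq.count e := by
        intro e hne
        have hne' : ¬ ((d, v) = e) := fun h => hne h.symm
        rw [hrest, hdecomp, List.count_append, List.count_append, List.count_cons]
        simp [hne']
      have hcount_dv : pq.count (d, v) = rest.count (d, v) + 1 := by
        rw [hrest, hdecomp, List.count_append, List.count_append, List.count_cons]
        simp
        omega
      obtain ⟨hrgv0, dv, hdv0, hdvle0⟩ := hP1 (d, v) hmem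
      have hrgv : PySem.Raise.InRange G.length v := hrgv0
      have hdv : dist.getD (pvIdx G.length v) none = some dv := hdv0
      have hdvle : dv ≤ d := hdvle0
      have hjmN : pvIdx G.length v < G.length := pvIdx_lt hrgv
      have hgd : PySem.List.pyGetD dist v none = dist.getD (pvIdx G.length v) none := by
        rw [pvGetD_eq dist v none (by rw [hld]; exact hrgv), hld]
      have hcond : (match PySem.List.pyGetD dist v none with
          | some dv => decide (dv < d)
          | none => false) = decide (dv < d) := by rw [hgd, hdv]
      have hLHS : pvLoopA G (f + 1) pq dist par vis =
          (if decide (dv < d) then pvLoopA G f rest dist par vis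
           else (pvLoopA G f (pvRelaxA (PySem.List.pyGetD G v []) d v vis (dist, par, rest)).2.2
              (pvRelaxA (PySem.List.pyGetD G v []) d v vis (dist, par, rest)).1
              (pvRelaxA (PySem.List.pyGetD G v []) d v vis (dist, par, rest)).2.1
              (PySem.List.pySetD vis v true))) := by
        simp only [pvLoopA, hpop, hcond]
      by_cases hskip : dv < d
      · -- stale entry: A pops and discards, the intermediate machine does not move
        rw [hLHS, if_pos (by simpa using hskip)]
        have hI' : pvInv G rest dist via pend := by
          refine ⟨hld, hlv, hlp, fun e he => hP1 e (hmemrest e he), ?_, ?_⟩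
          · intro e he hval
            obtain ⟨hpe, hve, hce⟩ := hP2 e (hmemrest e he) hval
            have hne : e ≠ (d, v) := by
              intro he2
              subst he2
              rw [hval] at hdv
              injection hdv with hdd
              omega
            exact ⟨hpe, hve, by rw [hcount_rest e hne]; exact hce⟩
          · intro j hj hpend
            obtain ⟨d0, x0, hd0, hv0, hrg0, hio0, hmem0⟩ := hP3 j hj hpend
            have hne : (d0, x0) ≠ (d, v) := by
              intro he2
              injection he2 with h1 h2
              subst h1; subst h2
              rw [← hio0] at hd0
              rw [hd0] at hdv
              injection hdv with hdd
              omega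
            refine ⟨d0, x0, hd0, hv0, hrg0, hio0, ?_⟩
            rw [hrest]
            rw [hdecomp] at hmem0
            rcases List.mem_append.mp hmem0 with h | h
            · exact List.mem_append_left _ h
            · rcases List.mem_cons.mp h with h | h
              · exact absurd h hne
              · exact List.mem_append_right _ h
        refine ihf fM rest dist par via vis pend hvis hI' ?_ hphi
        omega
      · -- valid entry: the bisimulation step
        have hdveq : dv = d := by omega
        rw [hdveq] at hdv
        obtain ⟨hpendv0, hviav0, hcountv0⟩ := hP2 (d, v) hmem hdv
        have hpendv : pend.getD (pvIdx G.length v) false = true := hpendv0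
        have hviav : via.getD (pvIdx G.length v) none = some v := hviav0
        have hcountv : pq.count (d, v) = 1 := hcountv0
        cases fM with
        | zero =>
          exfalso
          have := pvPhi_pos G.length vis pend (pvIdx G.length v) hjmN hpendv
          omega
        | succ fm =>
          -- the intermediate machine selects exactly this node
          have hsel : pvSelM G.length dist via pend = some ((d, v), ((pvIdx G.length v : Nat) : Int)) := by
            refine pvSelM_spec G.length dist via pend hld hlv hlp d v (pvIdx G.length v) hjmN hpendv hdv hviav ?_
            intro j' hj' hpend' d' x' hd' hv'
            obtain ⟨d0, x0, hd0, hv0, hrg0, hio0, hmem0⟩ := hP3 j' hj' hpend'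
            rw [hd0] at hd'
            rw [hv0] at hv'
            injection hd' with hd'e
            injection hv' with hv'e
            subst hd'e; subst hv'e
            constructor
            · exact hmin (d0, x0) hmem0
            · intro he
              injection he with h1 h2
              subst h2
              rw [← hio0]
          have hRHS : pvLoopM G (fm + 1) dist via vis pend =
              pvLoopM G fm (pvRelaxM (PySem.List.pyGetD G ((pvIdx G.length v : Nat) : Int) []) d vis
                  (dist, via, PySem.List.pySetD pend ((pvIdx G.length v : Nat) : Int) false)).1
                (pvRelaxM (PySem.List.pyGetD G ((pvIdx G.length v : Nat) : Int) []) d vis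
                  (dist, via, PySem.List.pySetD pend ((pvIdx G.length v : Nat) : Int) false)).2.1
                (PySem.List.pySetD vis ((pvIdx G.length v : Nat) : Int) true)
                (pvRelaxM (PySem.List.pyGetD G ((pvIdx G.length v : Nat) : Int) []) d vis
                  (dist, via, PySem.List.pySetD pend ((pvIdx G.length v : Nat) : Int) false)).2.2 := by
            simp only [pvLoopM, hsel]
          -- both sides read the same adjacency list and update the same arrays
          have hadjA : PySem.List.pyGetD G v [] = G.getD (pvIdx G.length v) [] := by
            rw [pvGetD_eq G v [] hrgv]
          have hadjB : PySem.List.pyGetD G ((pvIdx G.length v : Nat) : Int) [] = G.getD (pvIdx G.length v) [] := by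
            simp
          have hpendB : PySem.List.pySetD pend ((pvIdx G.length v : Nat) : Int) false = pend.set (pvIdx G.length v) false := by
            simp
          have hvisA : PySem.List.pySetD vis v true = vis.set (pvIdx G.length v) true := by
            rw [pvSetD_eq vis v true (by rw [hvis]; exact hrgv), hvis]
          have hvisB : PySem.List.pySetD vis ((pvIdx G.length v : Nat) : Int) true = vis.set (pvIdx G.length v) true := by
            simp
          have hadjmem : G.getD (pvIdx G.length v) [] ∈ G := by
            have hg : G.getD (pvIdx G.length v) [] = G[pvIdx G.length v]'hjmN := by
              simp [List.getD, List.getElem?_eq_getElem hjmN]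
            rw [hg]
            exact List.getElem_mem _
          have hadjwf : ∀ xw ∈ G.getD (pvIdx G.length v) [], PySem.Raise.InRange G.length xw.1 :=
            fun xw hxw => hWF _ hadjmem xw hxw
          have hadjT : (G.getD (pvIdx G.length v) []).length ≤ T := hT _ hadjmem
          -- the invariant holds for the popped queue with the pending bit cleared
          have hImid : pvInv G rest dist via (pend.set (pvIdx G.length v) false) := by
            refine ⟨hld, hlv, by simp [hlp], fun e he => hP1 e (hmemrest e he), ?_, ?_⟩
            · intro e he hval
              obtain ⟨hpe, hve, hce⟩ := hP2 e (hmemrest e he) hval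
              have hpos : pvIdx G.length e.2 ≠ pvIdx G.length v := by
                intro hpe2
                have hv2 : e.2 = v := by
                  rw [hpe2] at hve
                  exact Option.some.inj (hve.symm.trans hviav)
                have hd2 : e.1 = d := by
                  rw [hpe2] at hval
                  exact Option.some.inj (hval.symm.trans hdv)
                have he2 : e = (d, v) := Prod.ext hd2 hv2
                subst he2
                have h1 : 0 < rest.count (d, v) := List.count_pos_iff.mpr he
                omega
              refine ⟨?_, hve, ?_⟩
              · rw [pvGetD_set_ne _ _ _ _ _ (fun he2 => hpos he2.symm)]
                exact hpe
              · have hne : e ≠ (d, v) := by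
                  intro he2
                  apply hpos
                  rw [he2]
                rw [hcount_rest e hne]
                exact hce
            · intro j hj hpend
              have hjne : j ≠ pvIdx G.length v := by
                intro he2
                subst he2
                rw [pvGetD_set_self _ _ _ _ (by omega)] at hpend
                exact Bool.noConfusion hpend
              rw [pvGetD_set_ne _ _ _ _ _ (fun he2 => hjne he2.symm)] at hpend
              obtain ⟨d0, x0, hd0, hv0, hrg0, hio0, hmem0⟩ := hP3 j hj hpend
              have hne : (d0, x0) ≠ (d, v) := by
                intro he2
                injection he2 with h1 h2
                subst h2
                exact hjne hio0.symm
              refine ⟨d0, x0, hd0, hv0, hrg0, hio0, ?_⟩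
              rw [hrest]
              rw [hdecomp] at hmem0
              rcases List.mem_append.mp hmem0 with h | h
              · exact List.mem_append_left _ h
              · rcases List.mem_cons.mp h with h | h
                · exact absurd h hne
                · exact List.mem_append_right _ h
          obtain ⟨hEq, hLen, hInvNew, hPend⟩ := pvRelax_sim G d v vis hvis
            (G.getD (pvIdx G.length v) []) dist par via (pend.set (pvIdx G.length v) false) rest
            hadjwf hImid
          rw [hLHS, if_neg (by simpa using hskip), hRHS, hadjA, hadjB, hpendB, hvisA, hvisB, hEq]
          refine ihf fm _ _ _ _ _ _ (by simp [hvis]) hInvNew ?_ ?_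
          · have h2 : (T + 1) * (fm + 1) = (T + 1) * fm + (T + 1) := by ring
            rw [h2] at hfuel
            omega
          · have hstep := pvPhi_step G.length vis pend
              (pvRelaxM (G.getD (pvIdx G.length v) []) d vis (dist, via, pend.set (pvIdx G.length v) false)).2.2
              (pvIdx G.length v) hjmN hvis hlp hPend hpendv
            omega

-- ===== dict facts used by the frontier bisimulation =====

lemma pvFind?_filter_ne (l : List (Int × Int)) (k u : Int) (h : k ≠ u) :
    (l.filter (fun p => !(p.1 == u))).find? (fun p => p.1 == k) = l.find? (fun p => p.1 == k) := by
  induction l with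
  | nil => rfl
  | cons p l' ih =>
    have huk1 : (k = u) = False := by simp [h]
    have huk2 : (u = k) = False := by simp; exact fun he => h he.symm
    by_cases hp : p.1 = u
    · have hk : (p.1 == k) = false := by simp [hp]; exact fun he => h he.symm
      simp [List.filter_cons, hp, List.find?_cons, hk, ih, huk1, huk2]
    · by_cases hk : p.1 = k
      · simp [List.filter_cons, hp, List.find?_cons, hk, huk1, huk2]
      · simp [List.filter_cons, hp, List.find?_cons, hk, ih]

lemma pvGet?_erase_of_ne (F : PySem.Dict Int Int) (u k : Int) (h : k ≠ u) :
    (F.erase u).get? k = F.get? k := by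
  simp only [PySem.Dict.erase, PySem.Dict.get?]
  exact congrArg (Option.map _) (pvFind?_filter_ne F.items k u h)

lemma pvMem_items_erase (F : PySem.Dict Int Int) (u : Int) (p : Int × Int) :
    p ∈ (F.erase u).items ↔ p ∈ F.items ∧ p.1 ≠ u := by
  simp [PySem.Dict.erase, List.mem_filter]

lemma pvNodup_keys_erase (F : PySem.Dict Int Int) (u : Int) (h : F.keys.Nodup) :
    (F.erase u).keys.Nodup := by
  have hsub : ((F.items.filter (fun p => !(p.1 == u))).map Prod.fst).Sublist
      (F.items.map Prod.fst) := (List.filter_sublist).map _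
  simpa [PySem.Dict.keys, PySem.Dict.erase] using hsub.nodup (by simpa [PySem.Dict.keys] using h)

lemma pvSize_erase_lt (F : PySem.Dict Int Int) (u d : Int) (h : (u, d) ∈ F.items) :
    (F.erase u).size < F.size := by
  simp only [PySem.Dict.erase, PySem.Dict.size]
  refine List.length_filter_lt_length_iff_exists.mpr ⟨(u, d), h, by simp⟩

-- min over the frontier items
def pvMinStep (best : Option (Int × Int)) (p : Int × Int) : Option (Int × Int) :=
  match best with
  | none => some (p.2, p.1)
  | some m => if pvPairLt (p.2, p.1) m then some (p.2, p.1) else some m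

lemma pvMinPair_eq_fold (items : List (Int × Int)) :
    pvMinPair items = items.foldl pvMinStep none := rfl

lemma pvMinFold (l : List (Int × Int)) (m : Int × Int) :
    ∃ r, l.foldl pvMinStep (some m) = some r ∧ (r = m ∨ ∃ p ∈ l, r = (p.2, p.1)) ∧
      pvPairLt m r = false ∧ ∀ p ∈ l, pvPairLt (p.2, p.1) r = false := by
  induction l generalizing m with
  | nil => exact ⟨m, rfl, Or.inl rfl, pvPairLt_irrefl m, by simp⟩
  | cons p l' ih =>
    rw [List.foldl_cons]
    by_cases hlt : pvPairLt (p.2, p.1) m = true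
    · have hstep : pvMinStep (some m) p = some (p.2, p.1) := by
        simp [pvMinStep, hlt]
      rw [hstep]
      obtain ⟨r, hr, hor, hle, hall⟩ := ih (p.2, p.1)
      refine ⟨r, hr, ?_, ?_, ?_⟩
      · rcases hor with rfl | ⟨q, hq, rfl⟩
        · exact Or.inr ⟨p, List.mem_cons_self, rfl⟩
        · exact Or.inr ⟨q, List.mem_cons_of_mem _ hq, rfl⟩
      · exact pvPairLt_le_trans (pvPairLt_asymm' hlt) hle
      · intro q hq
        rcases List.mem_cons.mp hq with rfl | hq
        · exact hle
        · exact hall q hq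
    · have hstep : pvMinStep (some m) p = some m := by
        simp [pvMinStep, hlt]
      rw [hstep]
      obtain ⟨r, hr, hor, hle, hall⟩ := ih m
      refine ⟨r, hr, ?_, hle, ?_⟩
      · rcases hor with rfl | ⟨q, hq, rfl⟩
        · exact Or.inl rfl
        · exact Or.inr ⟨q, List.mem_cons_of_mem _ hq, rfl⟩
      · intro q hq
        rcases List.mem_cons.mp hq with rfl | hq
        · exact pvPairLt_le_trans (by simpa using hlt) hle
        · exact hall q hq

lemma pvMinPair_nil_iff (items : List (Int × Int)) :
    pvMinPair items = none ↔ items = [] := by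
  cases items with
  | nil => simp [pvMinPair]
  | cons p l =>
    rw [pvMinPair_eq_fold, List.foldl_cons]
    have hstep : pvMinStep none p = some (p.2, p.1) := rfl
    rw [hstep]
    obtain ⟨r, hr, _, _, _⟩ := pvMinFold l (p.2, p.1)
    simp [hr]

lemma pvMinPair_spec (items : List (Int × Int)) (m : Int × Int)
    (h : pvMinPair items = some m) :
    (∃ p ∈ items, m = (p.2, p.1)) ∧ ∀ p ∈ items, pvPairLt (p.2, p.1) m = false := by
  cases items with
  | nil => simp [pvMinPair] at h
  | cons p l =>
    rw [pvMinPair_eq_fold, List.foldl_cons] at h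
    have hstep : pvMinStep none p = some (p.2, p.1) := rfl
    rw [hstep] at h
    obtain ⟨r, hr, hor, hle, hall⟩ := pvMinFold l (p.2, p.1)
    rw [hr] at h
    injection h with h
    subst h
    refine ⟨?_, ?_⟩
    · rcases hor with rfl | ⟨q, hq, rfl⟩
      · exact ⟨p, List.mem_cons_self, rfl⟩
      · exact ⟨q, List.mem_cons_of_mem _ hq, rfl⟩
    · intro q hq
      rcases List.mem_cons.mp hq with rfl | hq
      · exact hle
      · exact hall q hq

-- the relation between the frontier dict and the pending/alias arrays
def pvRel (G : List (List (Int × Int))) (F : PySem.Dict Int Int)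
    (dist via : List (Option Int)) (pend : List Bool) : Prop :=
  dist.length = G.length ∧ via.length = G.length ∧ pend.length = G.length ∧
  F.keys.Nodup ∧
  (∀ p ∈ F.items, PySem.Raise.InRange G.length p.1 ∧
     ∃ dx, dist.getD (pvIdx G.length p.1) none = some dx ∧ dx ≤ p.2 ∧
       (dx = p.2 → pend.getD (pvIdx G.length p.1) false = true ∧
         via.getD (pvIdx G.length p.1) none = some p.1)) ∧
  (∀ j, j < G.length → pend.getD j false = true →
     ∃ d x, dist.getD j none = some d ∧ via.getD j none = some x ∧
       PySem.Raise.InRange G.length x ∧ pvIdx G.length x = j ∧ F.get? x = some d)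

lemma pvRel_erase_stale (G : List (List (Int × Int))) (F : PySem.Dict Int Int)
    (dist via : List (Option Int)) (pend : List Bool) (u d dx : Int)
    (h : pvRel G F dist via pend) (hmem : (u, d) ∈ F.items)
    (hdx : dist.getD (pvIdx G.length u) none = some dx) (hne : dx ≠ d) :
    pvRel G (F.erase u) dist via pend := by
  obtain ⟨h1, h2, h3, hnd, hR1, hR2⟩ := h
  refine ⟨h1, h2, h3, pvNodup_keys_erase F u hnd, ?_, ?_⟩
  · intro p hp
    exact hR1 p ((pvMem_items_erase F u p).mp hp).1
  · intro j hj hpend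
    obtain ⟨d', x', hd', hv', hrg', hio', hget'⟩ := hR2 j hj hpend
    have hxu : x' ≠ u := by
      intro he
      subst he
      have hgu : F.get? x' = some d := PySem.Dict.get?_of_mem_items F hmem hnd
      rw [hget'] at hgu
      injection hgu with hgu
      subst hgu
      rw [hio'] at hdx
      rw [hd'] at hdx
      injection hdx with hdx
      exact hne (hdx.symm) |>.elim
    exact ⟨d', x', hd', hv', hrg', hio', by rw [pvGet?_erase_of_ne F u x' hxu]; exact hget'⟩

lemma pvRel_pop (G : List (List (Int × Int))) (F : PySem.Dict Int Int)
    (dist via : List (Option Int)) (pend : List Bool) (u d : Int)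
    (h : pvRel G F dist via pend) (hu : PySem.Raise.InRange G.length u)
    (hmem : (u, d) ∈ F.items)
    (hd : dist.getD (pvIdx G.length u) none = some d) :
    pvRel G (F.erase u) dist via (pend.set (pvIdx G.length u) false) := by
  obtain ⟨h1, h2, h3, hnd, hR1, hR2⟩ := h
  have hju : pvIdx G.length u < G.length := pvIdx_lt hu
  have hviau : via.getD (pvIdx G.length u) none = some u := by
    obtain ⟨_, dx, hdx, _, hcl⟩ := hR1 (u, d) hmem
    rw [hd] at hdx
    injection hdx with hdx
    exact (hcl hdx.symm).2
  refine ⟨h1, h2, by simp [h3], pvNodup_keys_erase F u hnd, ?_, ?_⟩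
  · intro p hp
    obtain ⟨hpF, hpu⟩ := (pvMem_items_erase F u p).mp hp
    obtain ⟨hrg, dx, hdx, hle, hcl⟩ := hR1 p hpF
    refine ⟨hrg, dx, hdx, hle, ?_⟩
    intro hexact
    obtain ⟨hpend', hvia'⟩ := hcl hexact
    by_cases hpos : pvIdx G.length p.1 = pvIdx G.length u
    · exfalso
      rw [hpos] at hvia'
      rw [hviau] at hvia'
      injection hvia' with hvia'
      exact hpu hvia'.symm
    · refine ⟨?_, hvia'⟩
      rw [pvGetD_set_ne _ _ _ _ _ (fun he => hpos he.symm)]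
      exact hpend'
  · intro j hj hpend
    have hjne : j ≠ pvIdx G.length u := by
      intro he
      subst he
      rw [pvGetD_set_self _ _ _ _ (by omega)] at hpend
      exact Bool.noConfusion hpend
    rw [pvGetD_set_ne _ _ _ _ _ (fun he => hjne he.symm)] at hpend
    obtain ⟨d', x', hd', hv', hrg', hio', hget'⟩ := hR2 j hj hpend
    have hxu : x' ≠ u := by
      intro he
      subst he
      rw [hio'] at hjne
      exact hjne rfl
    exact ⟨d', x', hd', hv', hrg', hio', by rw [pvGet?_erase_of_ne F u x' hxu]; exact hget'⟩

-- one relaxation update preserves the relation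
lemma pvRel_update (G : List (List (Int × Int))) (F : PySem.Dict Int Int)
    (dist via : List (Option Int)) (pend : List Bool)
    (h : pvRel G F dist via pend) (x nd : Int)
    (hx : PySem.Raise.InRange G.length x)
    (himp : dist.getD (pvIdx G.length x) none = none ∨
      ∃ dxo, dist.getD (pvIdx G.length x) none = some dxo ∧ nd < dxo) :
    pvRel G (F.insert x nd) (dist.set (pvIdx G.length x) (some nd))
      (via.set (pvIdx G.length x) (some x)) (pend.set (pvIdx G.length x) true) := by
  obtain ⟨h1, h2, h3, hnd, hR1, hR2⟩ := h
  have hjx : pvIdx G.length x < G.length := pvIdx_lt hx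
  refine ⟨by simp [h1], by simp [h2], by simp [h3],
    PySem.Dict.nodup_keys_insert F x nd hnd, ?_, ?_⟩
  · intro p hp
    rcases (PySem.Dict.mem_items_insert F x nd p).mp hp with rfl | ⟨hpF, hpx⟩
    · refine ⟨hx, nd, ?_, le_refl nd, ?_⟩
      · rw [pvGetD_set_self _ _ _ _ (by omega)]
      · intro _
        constructor
        · rw [pvGetD_set_self _ _ _ _ (by omega)]
        · rw [pvGetD_set_self _ _ _ _ (by omega)]
    · obtain ⟨hrg, dx, hdx, hle, hcl⟩ := hR1 p hpF
      by_cases hpos : pvIdx G.length p.1 = pvIdx G.length x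
      · -- an alias of the updated node: the old entry becomes strictly stale
        rcases himp with hnone | ⟨dxo, hdxo, hlt⟩
        · rw [hpos] at hdx; rw [hdx] at hnone; cases hnone
        · rw [hpos] at hdx
          rw [hdx] at hdxo
          injection hdxo with hdd
          subst hdd
          refine ⟨hrg, nd, ?_, by omega, ?_⟩
          · rw [hpos, pvGetD_set_self _ _ _ _ (by omega)]
          · intro he
            omega
      · refine ⟨hrg, dx, ?_, hle, ?_⟩
        · rw [pvGetD_set_ne _ _ _ _ _ (fun he => hpos he.symm)]
          exact hdx
        · intro hexact
          obtain ⟨hp', hv'⟩ := hcl hexact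
          constructor
          · rw [pvGetD_set_ne _ _ _ _ _ (fun he => hpos he.symm)]
            exact hp'
          · rw [pvGetD_set_ne _ _ _ _ _ (fun he => hpos he.symm)]
            exact hv'
  · intro j hj hpend
    by_cases hpos : j = pvIdx G.length x
    · subst hpos
      refine ⟨nd, x, ?_, ?_, hx, rfl, ?_⟩
      · rw [pvGetD_set_self _ _ _ _ (by omega)]
      · rw [pvGetD_set_self _ _ _ _ (by omega)]
      · exact PySem.Dict.get?_insert_self F x nd
    · rw [pvGetD_set_ne _ _ _ _ _ (fun he => hpos he.symm)] at hpend
      obtain ⟨d', x', hd', hv', hrg', hio', hget'⟩ := hR2 j hj hpend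
      have hxx : x' ≠ x := by
        intro he
        subst he
        rw [hio'] at hpos
        exact hpos rfl
      refine ⟨d', x', ?_, ?_, hrg', hio', ?_⟩
      · rw [pvGetD_set_ne _ _ _ _ _ (fun he => hpos he.symm)]
        exact hd'
      · rw [pvGetD_set_ne _ _ _ _ _ (fun he => hpos he.symm)]
        exact hv'
      · rw [PySem.Dict.get?_insert_of_ne F nd hxx]
        exact hget'

-- proof-side name for B's relaxation step
def pvStepD (cd : Int) (vis : List Bool)
    (st : List (Option Int) × PySem.Dict Int Int) (xw : Int × Int) :
    List (Option Int) × PySem.Dict Int Int :=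
  if !(PySem.List.pyGetD vis xw.1 false) && (match PySem.List.pyGetD st.1 xw.1 none with
      | none => true
      | some dx => decide (cd + xw.2 < dx)) then
    (PySem.List.pySetD st.1 xw.1 (some (cd + xw.2)), st.2.insert xw.1 (cd + xw.2))
  else st

lemma pvRelaxB_eq_fold (adj : List (Int × Int)) (cd : Int) (vis : List Bool)
    (st : List (Option Int) × PySem.Dict Int Int) :
    pvRelaxB adj cd vis st = adj.foldl (pvStepD cd vis) st := rfl

lemma pvRelax2 (G : List (List (Int × Int))) (cd : Int) (vis : List Bool)
    (hvis : vis.length = G.length) :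
    ∀ (adj : List (Int × Int)) (dist via : List (Option Int)) (pend : List Bool)
      (F : PySem.Dict Int Int),
    (∀ xw ∈ adj, PySem.Raise.InRange G.length xw.1) →
    pvRel G F dist via pend →
    (pvRelaxB adj cd vis (dist, F)).1 = (pvRelaxM adj cd vis (dist, via, pend)).1 ∧
    pvRel G (pvRelaxB adj cd vis (dist, F)).2
      (pvRelaxM adj cd vis (dist, via, pend)).1
      (pvRelaxM adj cd vis (dist, via, pend)).2.1
      (pvRelaxM adj cd vis (dist, via, pend)).2.2 ∧
    (pvRelaxB adj cd vis (dist, F)).2.size ≤ F.size + adj.length ∧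
    (∀ j : Nat, vis.getD j false = true →
      (pvRelaxM adj cd vis (dist, via, pend)).2.2.getD j false = pend.getD j false) := by
  intro adj
  induction adj with
  | nil =>
    intro dist via pend F _ hR
    exact ⟨rfl, by simpa [pvRelaxB, pvRelaxM] using hR, by simp [pvRelaxB], fun j _ => rfl⟩
  | cons xw adj' ih =>
    intro dist via pend F hadj hR
    have hld : dist.length = G.length := hR.1
    have hlv : via.length = G.length := hR.2.1
    have hlp : pend.length = G.length := hR.2.2.1
    have hx : PySem.Raise.InRange G.length xw.1 := hadj xw List.mem_cons_self
    have hadj' : ∀ yw ∈ adj', PySem.Raise.InRange G.length yw.1 :=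
      fun yw hyw => hadj yw (List.mem_cons_of_mem _ hyw)
    have hjN : pvIdx G.length xw.1 < G.length := pvIdx_lt hx
    have hgvis : PySem.List.pyGetD vis xw.1 false = vis.getD (pvIdx G.length xw.1) false := by
      rw [pvGetD_eq vis xw.1 false (by rw [hvis]; exact hx), hvis]
    have hgdist : PySem.List.pyGetD dist xw.1 none = dist.getD (pvIdx G.length xw.1) none := by
      rw [pvGetD_eq dist xw.1 none (by rw [hld]; exact hx), hld]
    rw [pvRelaxB_eq_fold, pvRelaxM_eq_fold, List.foldl_cons, List.foldl_cons,
        ← pvRelaxB_eq_fold, ← pvRelaxM_eq_fold]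
    by_cases hc : (!(PySem.List.pyGetD vis xw.1 false) && (match PySem.List.pyGetD dist xw.1 none with
        | none => true
        | some dx => decide (cd + xw.2 < dx))) = true
    · obtain ⟨hcv, hci⟩ := Bool.and_eq_true_iff.mp hc
      have hvisj : vis.getD (pvIdx G.length xw.1) false = false := by
        rw [← hgvis]; revert hcv; cases PySem.List.pyGetD vis xw.1 false <;> simp
      have himp : dist.getD (pvIdx G.length xw.1) none = none ∨
          ∃ dxo, dist.getD (pvIdx G.length xw.1) none = some dxo ∧ cd + xw.2 < dxo := by
        rw [← hgdist]
        cases hdx : PySem.List.pyGetD dist xw.1 none with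
        | none => exact Or.inl rfl
        | some dx =>
          refine Or.inr ⟨dx, rfl, ?_⟩
          rw [hdx] at hci
          exact of_decide_eq_true hci
      have hstepD : pvStepD cd vis (dist, F) xw =
          (dist.set (pvIdx G.length xw.1) (some (cd + xw.2)), F.insert xw.1 (cd + xw.2)) := by
        unfold pvStepD
        rw [if_pos hc]
        rw [pvSetD_eq dist xw.1 (some (cd + xw.2)) (by rw [hld]; exact hx), hld]
      have hstepM : pvStepM cd vis (dist, via, pend) xw =
          (dist.set (pvIdx G.length xw.1) (some (cd + xw.2)),
           via.set (pvIdx G.length xw.1) (some xw.1),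
           pend.set (pvIdx G.length xw.1) true) := by
        unfold pvStepM
        rw [if_pos hc]
        rw [pvSetD_eq dist xw.1 (some (cd + xw.2)) (by rw [hld]; exact hx), hld,
            pvSetD_eq via xw.1 (some xw.1) (by rw [hlv]; exact hx), hlv,
            pvSetD_eq pend xw.1 true (by rw [hlp]; exact hx), hlp]
      rw [hstepD, hstepM]
      have hR' := pvRel_update G F dist via pend hR xw.1 (cd + xw.2) hx himp
      obtain ⟨ihEq, ihRel, ihSize, ihPend⟩ := ih (dist.set (pvIdx G.length xw.1) (some (cd + xw.2)))
        (via.set (pvIdx G.length xw.1) (some xw.1))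
        (pend.set (pvIdx G.length xw.1) true)
        (F.insert xw.1 (cd + xw.2)) hadj' hR'
      refine ⟨ihEq, ihRel, ?_, ?_⟩
      · have hsz : (F.insert xw.1 (cd + xw.2)).size ≤ F.size + 1 := by
          rw [PySem.Dict.size_insert]
          split <;> omega
        calc (pvRelaxB adj' cd vis _).2.size
            ≤ (F.insert xw.1 (cd + xw.2)).size + adj'.length := ihSize
          _ ≤ F.size + (xw :: adj').length := by simp [List.length_cons]; omega
      · intro j' hvj'
        rw [ihPend j' hvj']
        have hne : pvIdx G.length xw.1 ≠ j' := by
          intro he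
          rw [he] at hvisj
          rw [hvisj] at hvj'
          exact Bool.noConfusion hvj'
        exact pvGetD_set_ne pend _ j' true false hne
    · have hstepD : pvStepD cd vis (dist, F) xw = (dist, F) := by
        unfold pvStepD; rw [if_neg hc]
      have hstepM : pvStepM cd vis (dist, via, pend) xw = (dist, via, pend) := by
        unfold pvStepM; rw [if_neg hc]
      rw [hstepD, hstepM]
      obtain ⟨ihEq, ihRel, ihSize, ihPend⟩ := ih dist via pend F hadj' hR
      exact ⟨ihEq, ihRel, le_trans ihSize (by simp), ihPend⟩

-- the frontier loop computes exactly what the intermediate machine computes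
lemma pvMain2 (G : List (List (Int × Int))) (T : Nat)
    (hWF : pvWFG G) (hT : ∀ adj ∈ G, adj.length ≤ T) :
    ∀ fB fM (F : PySem.Dict Int Int) dist via vis pend,
    vis.length = G.length →
    pvRel G F dist via pend →
    F.size + (T + 1) * fM + 1 ≤ fB →
    pvPhi G.length vis pend ≤ fM →
    pvLoopB G fB F dist vis = pvLoopM G fM dist via vis pend := by
  intro fB
  induction fB with
  | zero =>
    intro fM F dist via vis pend _ _ hfuel _
    omega
  | succ f ihf =>
    intro fM F dist via vis pend hvis hR hfuel hphi
    have hR' := hR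
    obtain ⟨hld, hlv, hlp, hnd, hR1, hR2⟩ := hR'
    cases hmp : pvMinPair F.items with
    | none =>
      have hitems : F.items = [] := (pvMinPair_nil_iff F.items).mp hmp
      have hnp : ∀ j : Nat, j < G.length → pend.getD j false = false := by
        intro j hj
        by_contra hcon
        have hpt : pend.getD j false = true := by
          revert hcon; cases pend.getD j false <;> simp
        obtain ⟨d0, x0, _, _, _, _, hget0⟩ := hR2 j hj hpt
        have := PySem.Dict.mem_items_of_get?_eq_some F hget0
        rw [hitems] at this
        simp at this
      rw [pvLoopM_nopend G fM dist via vis pend hnp]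
      simp only [pvLoopB, hmp]
    | some du =>
      obtain ⟨d, u⟩ := du
      obtain ⟨⟨p0, hp0, hp0e⟩, hminF⟩ := pvMinPair_spec F.items (d, u) hmp
      have hmemud : (u, d) ∈ F.items := by
        have : p0 = (u, d) := by
          obtain ⟨p1, p2⟩ := p0
          injection hp0e with e1 e2
          subst e1; subst e2
          rfl
        rw [← this]; exact hp0
      obtain ⟨hrgu, dx, hdx, hdxle, hclu⟩ := hR1 (u, d) hmemud
      have hju : pvIdx G.length u < G.length := pvIdx_lt hrgu
      have hgd : PySem.List.pyGetD dist u none = dist.getD (pvIdx G.length u) none := by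
        rw [pvGetD_eq dist u none (by rw [hld]; exact hrgu), hld]
      have hcond : (match PySem.List.pyGetD dist u none with
          | some du => decide (du < d)
          | none => false) = decide (dx < d) := by rw [hgd, hdx]
      have hLHS : pvLoopB G (f + 1) F dist vis =
          (if decide (dx < d) then pvLoopB G f (F.erase u) dist vis
           else pvLoopB G f
              (pvRelaxB (PySem.List.pyGetD G u []) d vis (dist, F.erase u)).2
              (pvRelaxB (PySem.List.pyGetD G u []) d vis (dist, F.erase u)).1
              (PySem.List.pySetD vis u true)) := by
        simp only [pvLoopB, hmp, hcond]
      by_cases hskip : dx < d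
      · -- a stale frontier entry: B removes it and moves on
        rw [hLHS, if_pos (by simpa using hskip)]
        have hR'' : pvRel G (F.erase u) dist via pend :=
          pvRel_erase_stale G F dist via pend u d dx hR hmemud hdx (by omega)
        refine ihf fM (F.erase u) dist via vis pend hvis hR'' ?_ hphi
        have := pvSize_erase_lt F u d hmemud
        omega
      · -- the minimal entry is current: both machines expand this node
        have hdxeq : dx = d := by omega
        subst hdxeq
        obtain ⟨hpendu, hviau⟩ := hclu rfl
        cases fM with
        | zero =>
          exfalso
          have := pvPhi_pos G.length vis pend (pvIdx G.length u) hju hpendu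
          omega
        | succ fm =>
          have hsel : pvSelM G.length dist via pend = some ((dx, u), ((pvIdx G.length u : Nat) : Int)) := by
            refine pvSelM_spec G.length dist via pend hld hlv hlp dx u (pvIdx G.length u) hju hpendu hdx hviau ?_
            intro j' hj' hpend' d' x' hd' hv'
            obtain ⟨d0, x0, hd0, hv0, hrg0, hio0, hget0⟩ := hR2 j' hj' hpend'
            rw [hd0] at hd'
            rw [hv0] at hv'
            injection hd' with hd'e
            injection hv' with hv'e
            subst hd'e; subst hv'e
            have hmem0 : (x0, d0) ∈ F.items := PySem.Dict.mem_items_of_get?_eq_some F hget0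
            constructor
            · exact hminF (x0, d0) hmem0
            · intro he
              injection he with h1 h2
              subst h2
              rw [← hio0]
          have hRHS : pvLoopM G (fm + 1) dist via vis pend =
              pvLoopM G fm (pvRelaxM (PySem.List.pyGetD G ((pvIdx G.length u : Nat) : Int) []) dx vis
                  (dist, via, PySem.List.pySetD pend ((pvIdx G.length u : Nat) : Int) false)).1
                (pvRelaxM (PySem.List.pyGetD G ((pvIdx G.length u : Nat) : Int) []) dx vis
                  (dist, via, PySem.List.pySetD pend ((pvIdx G.length u : Nat) : Int) false)).2.1
                (PySem.List.pySetD vis ((pvIdx G.length u : Nat) : Int) true)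
                (pvRelaxM (PySem.List.pyGetD G ((pvIdx G.length u : Nat) : Int) []) dx vis
                  (dist, via, PySem.List.pySetD pend ((pvIdx G.length u : Nat) : Int) false)).2.2 := by
            simp only [pvLoopM, hsel]
          have hadjB : PySem.List.pyGetD G u [] = G.getD (pvIdx G.length u) [] := by
            rw [pvGetD_eq G u [] hrgu]
          have hadjM : PySem.List.pyGetD G ((pvIdx G.length u : Nat) : Int) [] = G.getD (pvIdx G.length u) [] := by
            simp
          have hpendM : PySem.List.pySetD pend ((pvIdx G.length u : Nat) : Int) false = pend.set (pvIdx G.length u) false := by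
            simp
          have hvisB : PySem.List.pySetD vis u true = vis.set (pvIdx G.length u) true := by
            rw [pvSetD_eq vis u true (by rw [hvis]; exact hrgu), hvis]
          have hvisM : PySem.List.pySetD vis ((pvIdx G.length u : Nat) : Int) true = vis.set (pvIdx G.length u) true := by
            simp
          have hadjmem : G.getD (pvIdx G.length u) [] ∈ G := by
            have hg : G.getD (pvIdx G.length u) [] = G[pvIdx G.length u]'hju := by
              simp [List.getD, List.getElem?_eq_getElem hju]
            rw [hg]
            exact List.getElem_mem _
          have hadjwf : ∀ xw ∈ G.getD (pvIdx G.length u) [], PySem.Raise.InRange G.length xw.1 :=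
            fun xw hxw => hWF _ hadjmem xw hxw
          have hadjT : (G.getD (pvIdx G.length u) []).length ≤ T := hT _ hadjmem
          have hRmid : pvRel G (F.erase u) dist via (pend.set (pvIdx G.length u) false) :=
            pvRel_pop G F dist via pend u dx hR hrgu hmemud hdx
          obtain ⟨hEq, hRelNew, hSize, hPend⟩ := pvRelax2 G dx vis hvis
            (G.getD (pvIdx G.length u) []) dist via (pend.set (pvIdx G.length u) false)
            (F.erase u) hadjwf hRmid
          rw [hLHS, if_neg (by simpa using hskip), hRHS, hadjB, hadjM, hpendM, hvisB, hvisM, hEq]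
          refine ihf fm _ _ _ _ _ (by simp [hvis]) hRelNew ?_ ?_
          · have hszer : (F.erase u).size + 1 ≤ F.size := pvSize_erase_lt F u dx hmemud
            have h2 : (T + 1) * (fm + 1) = (T + 1) * fm + (T + 1) := by ring
            rw [h2] at hfuel
            have := le_trans hSize (by omega : (F.erase u).size + (G.getD (pvIdx G.length u) []).length ≤ (F.erase u).size + T)
            omega
          · have hstep := pvPhi_step G.length vis pend
              (pvRelaxM (G.getD (pvIdx G.length u) []) dx vis (dist, via, pend.set (pvIdx G.length u) false)).2.2
              (pvIdx G.length u) hju hvis hlp hPend hpendu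
            omega

-- ===== construction and assembly lemmas =====

lemma pvMax_some (xs : List Int) (h : xs ≠ []) : ∃ y, PySem.List.max? xs id = some y := by
  cases h2 : PySem.List.max? xs id with
  | none => exact absurd ((PySem.List.max?_eq_none_iff xs id).mp h2) h
  | some y => exact ⟨y, rfl⟩

-- the single grouping step of B's graph construction
def pvAdd (G : List (List (Int × Int))) (t : Int × Int × Int) : List (List (Int × Int)) :=
  PySem.List.pySetD G t.1 (PySem.List.pyGetD G t.1 [] ++ [(t.2.1, t.2.2)])

lemma pvArcsE : ∀ (E : List (Int × Int × Int)) (acc : List (Int × Int × Int)),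
    E.foldl (fun acc e => acc ++ [(e.1, e.2.1, e.2.2), (e.2.1, e.1, e.2.2)]) acc =
      acc ++ E.flatMap (fun e => [(e.1, e.2.1, e.2.2), (e.2.1, e.1, e.2.2)]) := by
  intro E
  induction E with
  | nil => intro acc; simp
  | cons e E' ih => intro acc; rw [List.foldl_cons, ih]; simp

lemma pvArcsS (m : Int) : ∀ (S : List Int) (acc : List (Int × Int × Int)),
    S.foldl (fun acc i => acc ++ [(m, i, (0:Int)), (i, m, (0:Int))]) acc =
      acc ++ S.flatMap (fun i => [(m, i, (0:Int)), (i, m, (0:Int))]) := by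
  intro S
  induction S with
  | nil => intro acc; simp
  | cons i S' ih => intro acc; rw [List.foldl_cons, ih]; simp

lemma pvFoldPairs {β : Type} (f g : β → Int × Int × Int) :
    ∀ (l : List β) (G0 : List (List (Int × Int))),
    (l.flatMap fun x => [f x, g x]).foldl pvAdd G0 =
      l.foldl (fun G x => pvAdd (pvAdd G (f x)) (g x)) G0 := by
  intro l
  induction l with
  | nil => intro G0; rfl
  | cons x l' ih =>
    intro G0
    rw [List.flatMap_cons, List.foldl_append, List.foldl_cons, ih]
    rfl

-- the common graph both ports build
def pvGraph (E : List (Int × Int × Int)) (S : List Int) (m : Int) : List (List (Int × Int)) :=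
  ((E.flatMap fun e => [(e.1, e.2.1, e.2.2), (e.2.1, e.1, e.2.2)]) ++
   (S.flatMap fun i => [(m, i, (0:Int)), (i, m, (0:Int))])).foldl pvAdd
    (List.replicate (m + 1).toNat [])

lemma pvSetD_out {α : Type} (xs : List α) (i : Int) (v : α)
    (h : ¬ PySem.Raise.InRange xs.length i) : PySem.List.pySetD xs i v = xs := by
  unfold PySem.List.pySetD
  rw [(PySem.List.pySet?_eq_none_iff _ _ _).mpr h]
  rfl

lemma pvBuild_wf (N : Nat) :
    ∀ (arcs : List (Int × Int × Int)) (G : List (List (Int × Int))),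
    G.length = N → (∀ adj ∈ G, ∀ xw ∈ adj, PySem.Raise.InRange N xw.1) →
    (∀ t ∈ arcs, PySem.Raise.InRange N t.2.1) →
    (arcs.foldl pvAdd G).length = N ∧
      (∀ adj ∈ arcs.foldl pvAdd G, ∀ xw ∈ adj, PySem.Raise.InRange N xw.1) := by
  intro arcs
  induction arcs with
  | nil => intro G h1 h2 _; exact ⟨h1, h2⟩
  | cons t arcs' ih =>
    intro G h1 h2 h3
    rw [List.foldl_cons]
    have h3' : ∀ t' ∈ arcs', PySem.Raise.InRange N t'.2.1 :=
      fun t' ht' => h3 t' (List.mem_cons_of_mem _ ht')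
    have ht : PySem.Raise.InRange N t.2.1 := h3 t List.mem_cons_self
    by_cases hr : PySem.Raise.InRange G.length t.1
    · have hset : pvAdd G t = G.set (pvIdx G.length t.1)
          (PySem.List.pyGetD G t.1 [] ++ [(t.2.1, t.2.2)]) := by
        unfold pvAdd
        rw [pvSetD_eq G t.1 _ hr]
      refine ih _ (by rw [hset]; simp [h1]) ?_ h3'
      rw [hset]
      intro adj hadj xw hxw
      rcases List.mem_or_eq_of_mem_set hadj with h | h
      · exact h2 adj h xw hxw
      · subst h
        rcases List.mem_append.mp hxw with h | h
        · exact h2 _ (PySem.List.pyGetD_mem G [] hr) xw h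
        · have : xw = (t.2.1, t.2.2) := by simpa using h
          subst this
          exact ht
    · have hset : pvAdd G t = G := pvSetD_out G t.1 _ hr
      rw [hset]
      exact ih G h1 h2 h3'

-- the intermediate machine's tail after the graph is built
def pvRunM (G : List (List (Int × Int))) (a b : Int) : Option Int :=
  PySem.List.pyGetD (pvLoopM G (2 * G.length)
    (PySem.List.pySetD (List.replicate G.length (none : Option Int)) a (some 0))
    (PySem.List.pySetD (List.replicate G.length (none : Option Int)) a (some a))
    (List.replicate G.length false)
    (PySem.List.pySetD (List.replicate G.length false) a true)) b none

lemma pvFoldLen (G : List (List (Int × Int))) :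
    ∀ init : Nat, G.foldl (fun acc adj => acc + adj.length) init = init + (G.map List.length).sum := by
  induction G with
  | nil => intro init; simp
  | cons adj G' ih => intro init; rw [List.foldl_cons, ih]; simp; omega

lemma pvCore (G : List (List (Int × Int))) (a b : Int)
    (hWF : pvWFG G) (ha : PySem.Raise.InRange G.length a) :
    pvDijkstra G a b = pvRunM G a b := by
  simp only [pvDijkstra, pvRunM]
  rw [pvFoldLen G 0, Nat.zero_add]
  have hja : pvIdx G.length a < G.length := pvIdx_lt ha
  have hdist0 : PySem.List.pySetD (List.replicate G.length (none : Option Int)) a (some 0) =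
      (List.replicate G.length (none : Option Int)).set (pvIdx G.length a) (some 0) := by
    rw [pvSetD_eq _ a _ (by simp; exact ha)]
    simp
  have hvia0 : PySem.List.pySetD (List.replicate G.length (none : Option Int)) a (some a) =
      (List.replicate G.length (none : Option Int)).set (pvIdx G.length a) (some a) := by
    rw [pvSetD_eq _ a _ (by simp; exact ha)]
    simp
  have hpend0 : PySem.List.pySetD (List.replicate G.length false) a true =
      (List.replicate G.length false).set (pvIdx G.length a) true := by
    rw [pvSetD_eq _ a _ (by simp; exact ha)]
    simp
  have hI0 : pvInv G [(0, a)]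
      ((List.replicate G.length (none : Option Int)).set (pvIdx G.length a) (some 0))
      ((List.replicate G.length (none : Option Int)).set (pvIdx G.length a) (some a))
      ((List.replicate G.length false).set (pvIdx G.length a) true) := by
    refine ⟨by simp, by simp, by simp, ?_, ?_, ?_⟩
    · intro e he
      have he' : e = (0, a) := by simpa using he
      subst he'
      exact ⟨ha, 0, by rw [pvGetD_set_self _ _ _ _ (by simp [hja])], le_refl 0⟩
    · intro e he _
      have he' : e = (0, a) := by simpa using he
      subst he'
      refine ⟨by rw [pvGetD_set_self _ _ _ _ (by simp [hja])],
        by rw [pvGetD_set_self _ _ _ _ (by simp [hja])], by simp⟩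
    · intro j hj hpend
      by_cases hpos : j = pvIdx G.length a
      · subst hpos
        exact ⟨0, a, by rw [pvGetD_set_self _ _ _ _ (by simp [hja])],
          by rw [pvGetD_set_self _ _ _ _ (by simp [hja])], ha, rfl, by simp⟩
      · exfalso
        rw [pvGetD_set_ne _ _ _ _ _ (fun he => hpos he.symm),
          pvGetD_replicate] at hpend
        simp [hj] at hpend
  have hT : ∀ adj ∈ G, adj.length ≤ (G.map List.length).sum := by
    intro adj hadj
    exact List.single_le_sum (fun x _ => Nat.zero_le x) _ (List.mem_map_of_mem hadj)
  have hfuel : (1 : Nat) + ((G.map List.length).sum + 1) * (2 * G.length) ≤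
      ((G.map List.length).sum + 2) * (2 * G.length + 2) := by
    have hexp : ((G.map List.length).sum + 2) * (2 * G.length + 2) =
        ((G.map List.length).sum + 1) * (2 * G.length) +
          (2 * G.length + 2 * (G.map List.length).sum + 4) := by ring
    rw [hexp]
    set K := ((G.map List.length).sum + 1) * (2 * G.length)
    omega
  have hmain := pvMain G ((G.map List.length).sum) hWF hT
    (((G.map List.length).sum + 2) * (2 * G.length + 2)) (2 * G.length)
    [(0, a)]
    ((List.replicate G.length (none : Option Int)).set (pvIdx G.length a) (some 0))
    (List.replicate G.length (none : Option Int))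
    ((List.replicate G.length (none : Option Int)).set (pvIdx G.length a) (some a))
    (List.replicate G.length false)
    ((List.replicate G.length false).set (pvIdx G.length a) true)
    (by simp) hI0 (by simpa using hfuel) (pvPhi_le _ _ _)
  rw [hdist0, hvia0, hpend0, hmain]
  cases hz : PySem.List.pyGetD (pvLoopM G (2 * G.length)
      ((List.replicate G.length (none : Option Int)).set (pvIdx G.length a) (some 0))
      ((List.replicate G.length (none : Option Int)).set (pvIdx G.length a) (some a))
      (List.replicate G.length false)
      ((List.replicate G.length false).set (pvIdx G.length a) true)) b none <;> rfl

-- B's tail equals the intermediate machine's tail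
lemma pvCore2 (G : List (List (Int × Int))) (a b : Int)
    (hWF : pvWFG G) (ha : PySem.Raise.InRange G.length a) :
    PySem.List.pyGetD (pvLoopB G
      ((G.foldl (fun acc adj => acc + adj.length) 0 + 1) * (2 * G.length) + 2)
      (PySem.Dict.mk [(a, (0:Int))])
      (PySem.List.pySetD (List.replicate G.length (none : Option Int)) a (some 0))
      (List.replicate G.length false)) b none = pvRunM G a b := by
  simp only [pvRunM]
  rw [pvFoldLen G 0, Nat.zero_add]
  have hja : pvIdx G.length a < G.length := pvIdx_lt ha
  have hdist0 : PySem.List.pySetD (List.replicate G.length (none : Option Int)) a (some 0) =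
      (List.replicate G.length (none : Option Int)).set (pvIdx G.length a) (some 0) := by
    rw [pvSetD_eq _ a _ (by simp; exact ha)]
    simp
  have hvia0 : PySem.List.pySetD (List.replicate G.length (none : Option Int)) a (some a) =
      (List.replicate G.length (none : Option Int)).set (pvIdx G.length a) (some a) := by
    rw [pvSetD_eq _ a _ (by simp; exact ha)]
    simp
  have hpend0 : PySem.List.pySetD (List.replicate G.length false) a true =
      (List.replicate G.length false).set (pvIdx G.length a) true := by
    rw [pvSetD_eq _ a _ (by simp; exact ha)]
    simp
  have hR0 : pvRel G (PySem.Dict.mk [(a, (0:Int))])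
      ((List.replicate G.length (none : Option Int)).set (pvIdx G.length a) (some 0))
      ((List.replicate G.length (none : Option Int)).set (pvIdx G.length a) (some a))
      ((List.replicate G.length false).set (pvIdx G.length a) true) := by
    refine ⟨by simp, by simp, by simp, by simp [PySem.Dict.keys], ?_, ?_⟩
    · intro p hp
      have hp' : p = (a, 0) := by simpa [PySem.Dict.items] using hp
      subst hp'
      refine ⟨ha, 0, by rw [pvGetD_set_self _ _ _ _ (by simp [hja])], le_refl 0, ?_⟩
      intro _
      exact ⟨by rw [pvGetD_set_self _ _ _ _ (by simp [hja])],
        by rw [pvGetD_set_self _ _ _ _ (by simp [hja])]⟩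
    · intro j hj hpend
      by_cases hpos : j = pvIdx G.length a
      · subst hpos
        refine ⟨0, a, by rw [pvGetD_set_self _ _ _ _ (by simp [hja])],
          by rw [pvGetD_set_self _ _ _ _ (by simp [hja])], ha, rfl, ?_⟩
        simp [PySem.Dict.get?, PySem.Dict.items]
      · exfalso
        rw [pvGetD_set_ne _ _ _ _ _ (fun he => hpos he.symm),
          pvGetD_replicate] at hpend
        simp [hj] at hpend
  have hT : ∀ adj ∈ G, adj.length ≤ (G.map List.length).sum := by
    intro adj hadj
    exact List.single_le_sum (fun x _ => Nat.zero_le x) _ (List.mem_map_of_mem hadj)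
  have hsz : (PySem.Dict.mk [(a, (0:Int))]).size = 1 := rfl
  have hfuel : (PySem.Dict.mk [(a, (0:Int))]).size + ((G.map List.length).sum + 1) * (2 * G.length) + 1 ≤
      ((G.map List.length).sum + 1) * (2 * G.length) + 2 := by
    rw [hsz]
    omega
  have hmain := pvMain2 G ((G.map List.length).sum) hWF hT
    (((G.map List.length).sum + 1) * (2 * G.length) + 2) (2 * G.length)
    (PySem.Dict.mk [(a, (0:Int))])
    ((List.replicate G.length (none : Option Int)).set (pvIdx G.length a) (some 0))
    ((List.replicate G.length (none : Option Int)).set (pvIdx G.length a) (some a))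
    (List.replicate G.length false)
    ((List.replicate G.length false).set (pvIdx G.length a) true)
    (by simp) hR0 hfuel (pvPhi_le _ _ _)
  rw [hdist0, hvia0, hpend0, hmain]

lemma pvPortA_graph (E : List (Int × Int × Int)) (S : List Int) (m : Int) :
    S.foldl (fun G i =>
        let Ga := PySem.List.pySetD G m (PySem.List.pyGetD G m [] ++ [(i, (0:Int))])
        PySem.List.pySetD Ga i (PySem.List.pyGetD Ga i [] ++ [(m, (0:Int))]))
      (E.foldl (fun G e =>
        let Ga := PySem.List.pySetD G e.1 (PySem.List.pyGetD G e.1 [] ++ [(e.2.1, e.2.2)])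
        PySem.List.pySetD Ga e.2.1 (PySem.List.pyGetD Ga e.2.1 [] ++ [(e.1, e.2.2)]))
        (List.replicate (m + 1).toNat [])) = pvGraph E S m := by
  have hfE : (fun (G : List (List (Int × Int))) (e : Int × Int × Int) =>
        let Ga := PySem.List.pySetD G e.1 (PySem.List.pyGetD G e.1 [] ++ [(e.2.1, e.2.2)])
        PySem.List.pySetD Ga e.2.1 (PySem.List.pyGetD Ga e.2.1 [] ++ [(e.1, e.2.2)])) =
      (fun G e => pvAdd (pvAdd G ((fun e => (e.1, e.2.1, e.2.2)) e)) ((fun e => (e.2.1, e.1, e.2.2)) e)) := by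
    funext G e; rfl
  have hfS : (fun (G : List (List (Int × Int))) (i : Int) =>
        let Ga := PySem.List.pySetD G m (PySem.List.pyGetD G m [] ++ [(i, (0:Int))])
        PySem.List.pySetD Ga i (PySem.List.pyGetD Ga i [] ++ [(m, (0:Int))])) =
      (fun G i => pvAdd (pvAdd G ((fun i => (m, i, (0:Int))) i)) ((fun i => (i, m, (0:Int))) i)) := by
    funext G i; rfl
  rw [hfE, hfS, ← pvFoldPairs (fun e => (e.1, e.2.1, e.2.2)) (fun e => (e.2.1, e.1, e.2.2)) E,
    ← pvFoldPairs (fun i => (m, i, (0:Int))) (fun i => (i, m, (0:Int))) S]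
  unfold pvGraph
  rw [List.foldl_append]

lemma pvPortB_graph (E : List (Int × Int × Int)) (S : List Int) (m : Int) :
    (S.foldl (fun acc i => acc ++ [(m, i, (0:Int)), (i, m, (0:Int))])
      (E.foldl (fun acc e => acc ++ [(e.1, e.2.1, e.2.2), (e.2.1, e.1, e.2.2)])
        ([] : List (Int × Int × Int)))).foldl
      (fun G e => PySem.List.pySetD G e.1 (PySem.List.pyGetD G e.1 [] ++ [(e.2.1, e.2.2)]))
      (List.replicate (m + 1).toNat []) = pvGraph E S m := by
  have hf : (fun (G : List (List (Int × Int))) (e : Int × Int × Int) =>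
      PySem.List.pySetD G e.1 (PySem.List.pyGetD G e.1 [] ++ [(e.2.1, e.2.2)])) = pvAdd := by
    funext G e; rfl
  rw [pvArcsE E [], pvArcsS m S, hf]
  unfold pvGraph
  rw [List.nil_append]

-- ===== VERDICT (by name: the statement is the Claim_ definition above) =====
theorem spacetravel_spec : Claim_equal_spacetravel := by
  unfold Claim_equal_spacetravel
  intro n E S a b _hdom hpre
  obtain ⟨hE, hEE, hSS, ha, hb⟩ := hpre
  obtain ⟨vm, hvm⟩ := pvMax_some (E.map fun e => e.2.1) (by simpa using hE)
  have hNN : (max (max vm a) b + 1 + 1).toNat = pvSize E a b := by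
    unfold pvSize
    rw [hvm, Option.getD_some]
    congr 1
    omega
  have hN0 : 0 < pvSize E a b := by
    obtain ⟨h1, h2⟩ := ha
    by_contra hc
    have h0 : pvSize E a b = 0 := by omega
    rw [h0] at h1 h2
    omega
  have hmr : PySem.Raise.InRange (pvSize E a b) (max (max vm a) b + 1) := by
    constructor <;> omega
  have harcs : ∀ t ∈ (E.flatMap fun e => [(e.1, e.2.1, e.2.2), (e.2.1, e.1, e.2.2)]) ++
      (S.flatMap fun i => [(max (max vm a) b + 1, i, (0:Int)), (i, max (max vm a) b + 1, (0:Int))]),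
      PySem.Raise.InRange (pvSize E a b) t.2.1 := by
    intro t ht
    rcases List.mem_append.mp ht with h | h
    · obtain ⟨e, he, hte⟩ := List.mem_flatMap.mp h
      obtain ⟨h1, h2⟩ := hEE e he
      rcases List.mem_cons.mp hte with h | h
      · subst h; exact h2
      · have ht2 : t = (e.2.1, e.1, e.2.2) := by simpa using h
        subst ht2; exact h1
    · obtain ⟨i, hi, hti⟩ := List.mem_flatMap.mp h
      rcases List.mem_cons.mp hti with h | h
      · subst h; exact hSS i hi
      · have ht2 : t = (i, max (max vm a) b + 1, (0:Int)) := by simpa using h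
        subst ht2; exact hmr
  have hbuild := pvBuild_wf (pvSize E a b) _ (List.replicate (pvSize E a b) [])
    (by simp) (by simp) harcs
  have hGlen : (pvGraph E S (max (max vm a) b + 1)).length = pvSize E a b := by
    unfold pvGraph
    rw [hNN]
    exact hbuild.1
  have hGwf : pvWFG (pvGraph E S (max (max vm a) b + 1)) := by
    intro adj hadj xw hxw
    rw [hGlen]
    refine hbuild.2 adj ?_ xw hxw
    unfold pvGraph at hadj
    rw [hNN] at hadj
    exact hadj
  have ha' : PySem.Raise.InRange (pvGraph E S (max (max vm a) b + 1)).length a := by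
    rw [hGlen]; exact ha
  unfold Spec_spacetravel spacetravel spacetravel_alt
  simp only [hvm]
  rw [pvPortA_graph E S (max (max vm a) b + 1), pvPortB_graph E S (max (max vm a) b + 1),
    pvCore (pvGraph E S (max (max vm a) b + 1)) a b hGwf ha',
    pvCore2 (pvGraph E S (max (max vm a) b + 1)) a b hGwf ha']
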